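-- pv_equiv track=rewrite | github.com/Isaac51743/Algorithms-in-Python | src/DP/DP(geometric).py | findLargestSquareSurroundedByOne
-- ===== SOURCE A (Python) =====
-- def findLargestSquareSurroundedByOne(matrix):
--     if len(matrix) == 0 or len(matrix[0]) == 0:
--         return None
--     leftToRight = [[0 for _ in range(len(matrix[0]))] for _ in range(len(matrix))]
--     rightToLeft = [[0 for _ in range(len(matrix[0]))] for _ in range(len(matrix))]
--     topToBottom = [[0 for _ in range(len(matrix[0]))] for _ in range(len(matrix))]
--     bottomToTop = [[0 for _ in range(len(matrix[0]))] for _ in range(len(matrix))]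
--     # topLeftCorner = [[0 for _ in range(len(matrix[0]))] for _ in range(len(matrix))]
--     # bottomRightCorner = [[0 for _ in range(len(matrix[0]))] for _ in range(len(matrix))]
--     for index1 in range(len(matrix)):
--         row = index1
--         leftToRight[row][0] = matrix[row][0]
--         for index2 in range(1, len(matrix[0])):
--             column = index2
--             if matrix[row][column] == 0:
--                 leftToRight[row][column] = 0
--             else:
--                 leftToRight[row][column] = leftToRight[row][column - 1] + 1
--     for index1 in range(len(matrix)):
--         row = index1
--         rightToLeft[row][len(matrix[0]) - 1] = matrix[row][len(matrix[0]) - 1]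
--         for index2 in range(1, len(matrix[0])):
--             column = len(matrix[0]) - 1 - index2
--             if matrix[row][column] == 0:
--                 rightToLeft[row][column] = 0
--             else:
--                 rightToLeft[row][column] = rightToLeft[row][column + 1] + 1
--     for index1 in range(len(matrix[0])):
--         column = index1
--         topToBottom[0][column] = matrix[0][column]
--         for index2 in range(1, len(matrix)):
--             row = index2
--             if matrix[row][column] == 0:
--                 topToBottom[row][column] = 0
--             else:
--                 topToBottom[row][column] = topToBottom[row - 1][column] + 1
--     for index1 in range(len(matrix[0])):
--         column = index1
--         bottomToTop[len(matrix) - 1][column] = matrix[len(matrix) - 1][column]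
--         for index2 in range(1, len(matrix)):
--             row = len(matrix) - 1 - index2
--             if matrix[row][column] == 0:
--                 bottomToTop[row][column] = 0
--             else:
--                 bottomToTop[row][column] = bottomToTop[row + 1][column] + 1
--     globalMaxEdgeLength = 0
--     finalRow = finalColumn = -1
--     for row in range(len(matrix)):
--         for column in range(len(matrix[0])):
--             lengthOfTopLeftEdges = min(rightToLeft[row][column], bottomToTop[row][column])
--             for i in range(lengthOfTopLeftEdges):
--                 edgeLength = lengthOfTopLeftEdges - i
--                 rowOfBottomRightCorner = row + edgeLength - 1
--                 columnOfBottomRightCorner = column + edgeLength - 1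
--                 if rowOfBottomRightCorner < len(matrix) and columnOfBottomRightCorner < len(matrix[0]):
--                     bottomRightEdgeLength = min(leftToRight[rowOfBottomRightCorner][columnOfBottomRightCorner], topToBottom[rowOfBottomRightCorner][columnOfBottomRightCorner])
--                     if bottomRightEdgeLength >= edgeLength and edgeLength > globalMaxEdgeLength:
--                         globalMaxEdgeLength = edgeLength
--                         finalRow = row
--                         finalColumn = column
--                         break
--     return (globalMaxEdgeLength, finalRow, finalColumn)
-- ===== SOURCE B (Python) =====
-- def findLargestSquareSurroundedByOne(matrix):
--     if len(matrix) == 0 or len(matrix[0]) == 0: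
--         return None
--     h, w = len(matrix), len(matrix[0])
--
--     def scan(vals):
--         out = []
--         run = 0
--         first = True
--         for v in vals:
--             run = v if first else (0 if v == 0 else run + 1)
--             first = False
--             out.append(run)
--         return out
--
--     rows = [row[:w] for row in matrix]
--     ltr = [scan(row) for row in rows]
--     rtl = [scan(row[::-1])[::-1] for row in rows]
--     cols = [[row[c] for row in rows] for c in range(w)]
--     ttb = [scan(col) for col in cols]
--     btt = [scan(col[::-1])[::-1] for col in cols]
--     for k in range(min(h, w)):
--         s = min(h, w) - k
--         for r in range(h - s + 1):
--             for c in range(w - s + 1):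
--                 if (rtl[r][c] >= s and btt[c][r] >= s
--                         and ltr[r + s - 1][c + s - 1] >= s
--                         and ttb[c + s - 1][r + s - 1] >= s):
--                     return (s, r, c)
--     return (0, -1, -1)
-- ===== Notes on version B (the rewrite author's own statement) =====
-- stated objective: alternative
-- what changed: A mutates four 2-D run tables in place with index arithmetic and keeps a running per-cell maximum over a size-descending inner loop with break; B instead computes each run table as a pure one-dimensional scan per line (rows, reversed rows, columns, reversed columns; no 2-D mutation) and searches candidate edge lengths in decreasing order, returning the first row-major hit; Pre_ excludes ragged matrices (a row shorter than the first), on which A raises IndexError (B raises there too).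
import Mathlib
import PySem

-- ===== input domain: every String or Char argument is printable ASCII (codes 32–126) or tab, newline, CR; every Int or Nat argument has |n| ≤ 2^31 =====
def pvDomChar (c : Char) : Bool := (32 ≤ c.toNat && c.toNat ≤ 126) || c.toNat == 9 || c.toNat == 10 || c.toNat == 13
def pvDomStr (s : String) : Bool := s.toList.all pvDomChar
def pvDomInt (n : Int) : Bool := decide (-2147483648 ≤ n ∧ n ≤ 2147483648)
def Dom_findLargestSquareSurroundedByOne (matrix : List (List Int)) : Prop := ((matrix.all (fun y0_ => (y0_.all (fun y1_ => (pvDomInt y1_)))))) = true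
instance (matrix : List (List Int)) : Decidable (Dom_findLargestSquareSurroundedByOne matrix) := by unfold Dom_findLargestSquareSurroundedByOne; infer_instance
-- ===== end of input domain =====

-- B replaces A's four in-place 2-D run tables and per-cell running maximum by pure
-- one-dimensional scans per line and a size-descending search with early return
-- (alternative decomposition; not faster).

-- ===== PORT A =====
-- matrix[r][c] / table[r][c]; every access the ports make is in range under Pre_, so getD is exact
def pvCell (t : List (List Int)) (r c : Nat) : Int := (t.getD r []).getD c 0

-- table[r][c] = v (in-place update of a list of lists)
def pvSet2 (t : List (List Int)) (r c : Nat) (v : Int) : List (List Int) :=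
  t.modify r (fun row => row.set c v)

-- the four table-building loops of A, one helper per loop nest
def pvBuildLTR (matrix : List (List Int)) (h w : Nat) : List (List Int) :=
  (List.range h).foldl (fun t row =>
    let t := pvSet2 t row 0 (pvCell matrix row 0)
    (List.range (w - 1)).foldl (fun t i2 =>
      let column := i2 + 1
      if pvCell matrix row column = 0 then pvSet2 t row column 0
      else pvSet2 t row column (pvCell t row (column - 1) + 1)) t)
    (List.replicate h (List.replicate w (0 : Int)))

def pvBuildRTL (matrix : List (List Int)) (h w : Nat) : List (List Int) :=
  (List.range h).foldl (fun t row =>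
    let t := pvSet2 t row (w - 1) (pvCell matrix row (w - 1))
    (List.range (w - 1)).foldl (fun t i2 =>
      let column := w - 1 - (i2 + 1)
      if pvCell matrix row column = 0 then pvSet2 t row column 0
      else pvSet2 t row column (pvCell t row (column + 1) + 1)) t)
    (List.replicate h (List.replicate w (0 : Int)))

def pvBuildTTB (matrix : List (List Int)) (h w : Nat) : List (List Int) :=
  (List.range w).foldl (fun t column =>
    let t := pvSet2 t 0 column (pvCell matrix 0 column)
    (List.range (h - 1)).foldl (fun t i2 =>
      let row := i2 + 1
      if pvCell matrix row column = 0 then pvSet2 t row column 0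
      else pvSet2 t row column (pvCell t (row - 1) column + 1)) t)
    (List.replicate h (List.replicate w (0 : Int)))

def pvBuildBTT (matrix : List (List Int)) (h w : Nat) : List (List Int) :=
  (List.range w).foldl (fun t column =>
    let t := pvSet2 t (h - 1) column (pvCell matrix (h - 1) column)
    (List.range (h - 1)).foldl (fun t i2 =>
      let row := h - 1 - (i2 + 1)
      if pvCell matrix row column = 0 then pvSet2 t row column 0
      else pvSet2 t row column (pvCell t (row + 1) column + 1)) t)
    (List.replicate h (List.replicate w (0 : Int)))

-- the body of A's final double loop at one cell: 'for i in range(lengthOfTopLeftEdges): … break'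
def pvScanCell (ltr rtl ttb btt : List (List Int)) (h w : Nat)
    (st : Int × Int × Int) (row column : Nat) : Int × Int × Int :=
  let lengthOfTopLeftEdges := min (pvCell rtl row column) (pvCell btt row column)
  let inner := (PySem.List.pyRange 0 lengthOfTopLeftEdges 1).foldl
    (fun (st2 : (Int × Int × Int) × Bool) i =>
      if st2.2 then st2 else
      let g := st2.1.1
      let edgeLength := lengthOfTopLeftEdges - i
      let rowBR := (row : Int) + edgeLength - 1
      let colBR := (column : Int) + edgeLength - 1
      if rowBR < (h : Int) ∧ colBR < (w : Int) then
        let bottomRightEdgeLength :=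
          min (pvCell ltr rowBR.toNat colBR.toNat) (pvCell ttb rowBR.toNat colBR.toNat)
        if bottomRightEdgeLength ≥ edgeLength ∧ edgeLength > g then
          ((edgeLength, (row : Int), (column : Int)), true)
        else st2
      else st2) (st, false)
  inner.1

-- port of A
def findLargestSquareSurroundedByOne (matrix : List (List Int)) : Option (Int × Int × Int) :=
  match matrix with
  | [] => none
  | m0 :: _ =>
    if m0.length = 0 then none else
    let h := matrix.length
    let w := m0.length
    let leftToRight := pvBuildLTR matrix h w
    let rightToLeft := pvBuildRTL matrix h w
    let topToBottom := pvBuildTTB matrix h w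
    let bottomToTop := pvBuildBTT matrix h w
    some ((List.range h).foldl (fun st row =>
      (List.range w).foldl (fun st column =>
        pvScanCell leftToRight rightToLeft topToBottom bottomToTop h w st row column) st)
      ((0 : Int), (-1 : Int), (-1 : Int)))

-- ===== PORT B =====
-- B's scan(): run values of one line — first element raw, then 0 / previous + 1
-- (the Python loop over vals with state (run, first), as structural recursion)
def pvScanAux (run : Int) (first : Bool) : List Int → List Int
  | [] => []
  | v :: rest =>
    let r := if first then v else if v = 0 then 0 else run + 1
    r :: pvScanAux r false rest

def pvScan (vals : List Int) : List Int := pvScanAux 0 true vals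

-- port of B: pure per-line scans (rows, reversed rows, columns, reversed columns),
-- then candidate sizes descending, first row-major hit; row.getD c 0 is row[c],
-- in range under Pre_
def findLargestSquareSurroundedByOne_alt (matrix : List (List Int)) : Option (Int × Int × Int) :=
  match matrix with
  | [] => none
  | m0 :: _ =>
    if m0.length = 0 then none else
    let h := matrix.length
    let w := m0.length
    let rows := matrix.map (fun row => row.take w)
    let ltr := rows.map pvScan
    let rtl := rows.map (fun row => (pvScan row.reverse).reverse)
    let cols := (List.range w).map (fun c => rows.map (fun row => row.getD c 0))
    let ttb := cols.map pvScan
    let btt := cols.map (fun col => (pvScan col.reverse).reverse)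
    let hit := ((List.range (min h w)).map (fun k => min h w - k)).findSome? (fun s =>
      (List.range (h - s + 1)).findSome? (fun r =>
        (List.range (w - s + 1)).findSome? (fun c =>
          if ((rtl.getD r []).getD c 0 ≥ (s : Int) ∧ ((btt.getD c []).getD r 0 ≥ (s : Int)) ∧
              ((ltr.getD (r + s - 1) []).getD (c + s - 1) 0 ≥ (s : Int)) ∧
              ((ttb.getD (c + s - 1) []).getD (r + s - 1) 0 ≥ (s : Int)))
          then some ((s : Int), (r : Int), (c : Int)) else none)))
    match hit with
    | some t => some t
    | none => some (0, -1, -1)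

-- ===== PRECONDITION & SPEC =====
-- Pre_: every row is at least as long as the first; on shorter rows A raises IndexError.
def Pre_findLargestSquareSurroundedByOne (matrix : List (List Int)) : Prop :=
  ∀ row ∈ matrix, (matrix.headD []).length ≤ row.length

instance (matrix : List (List Int)) : Decidable (Pre_findLargestSquareSurroundedByOne matrix) := by
  unfold Pre_findLargestSquareSurroundedByOne; infer_instance

def pvWitness_findLargestSquareSurroundedByOne : List (List Int) := [[1, 1, 1], [1, 0, 1], [1, 1, 1]]

def Spec_findLargestSquareSurroundedByOne (matrix : List (List Int)) (out : Option (Int × Int × Int)) : Prop := out = findLargestSquareSurroundedByOne_alt matrix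
instance (matrix : List (List Int)) (out : Option (Int × Int × Int)) : Decidable (Spec_findLargestSquareSurroundedByOne matrix out) := by unfold Spec_findLargestSquareSurroundedByOne; infer_instance

-- ===== CLAIM (what is proved, stated in full; the proofs are below) =====
def Claim_equal_findLargestSquareSurroundedByOne : Prop := ∀ (matrix : List (List Int)), Dom_findLargestSquareSurroundedByOne matrix → Pre_findLargestSquareSurroundedByOne matrix → Spec_findLargestSquareSurroundedByOne matrix (findLargestSquareSurroundedByOne matrix)

-- ===== LEMMAS AND PROOFS =====

-- dimensions
def pvH (m : List (List Int)) : Nat := m.length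
def pvW (m : List (List Int)) : Nat := (m.headD []).length

-- the four run values of A's tables, as recurrences
def pvLtrS (m : List (List Int)) (r : Nat) : Nat → Int
  | 0 => pvCell m r 0
  | (c + 1) => if pvCell m r (c + 1) = 0 then 0 else pvLtrS m r c + 1
def pvTtbS (m : List (List Int)) (c : Nat) : Nat → Int
  | 0 => pvCell m 0 c
  | (r + 1) => if pvCell m (r + 1) c = 0 then 0 else pvTtbS m c r + 1
def pvRtlS (m : List (List Int)) (w r c : Nat) : Int :=
  if _h : c + 1 < w then (if pvCell m r c = 0 then 0 else pvRtlS m w r (c + 1) + 1)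
  else pvCell m r c
  termination_by w - c
def pvBttS (m : List (List Int)) (h r c : Nat) : Int :=
  if _h : r + 1 < h then (if pvCell m r c = 0 then 0 else pvBttS m h (r + 1) c + 1)
  else pvCell m r c
  termination_by h - r

-- the square at (r, c) with edge s fits and all four run values admit it
def pvValidB (m : List (List Int)) (s r c : Nat) : Bool :=
  decide (1 ≤ s) && decide (r + s ≤ pvH m) && decide (c + s ≤ pvW m) &&
  decide ((s : Int) ≤ pvRtlS m (pvW m) r c) && decide ((s : Int) ≤ pvBttS m (pvH m) r c) &&
  decide ((s : Int) ≤ pvLtrS m (r + s - 1) (c + s - 1)) &&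
  decide ((s : Int) ≤ pvTtbS m (c + s - 1) (r + s - 1))

-- largest valid edge length at a cell, 0 if none
def pvCB (m : List (List Int)) (r c : Nat) : Nat :=
  Nat.findGreatest (fun s => pvValidB m s r c = true) (min (pvH m - r) (pvW m - c))

-- the cells in row-major order, the global maximum, the canonical step and result
def pvCells (m : List (List Int)) : List (Nat × Nat) :=
  (List.range (pvH m)).flatMap fun r => (List.range (pvW m)).map fun c => (r, c)
def pvMOf (m : List (List Int)) (P : List (Nat × Nat)) : Nat :=
  P.foldl (fun a q => max a (pvCB m q.1 q.2)) 0
def pvCStep (m : List (List Int)) (st : Int × Int × Int) (q : Nat × Nat) : Int × Int × Int :=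
  if (pvCB m q.1 q.2 : Int) > st.1 then ((pvCB m q.1 q.2 : Int), (q.1 : Int), (q.2 : Int)) else st
def pvPred (m : List (List Int)) (P : List (Nat × Nat)) (q : Nat × Nat) : Bool :=
  decide (0 < pvCB m q.1 q.2 ∧ pvCB m q.1 q.2 = pvMOf m P)

def pvShape (t : List (List Int)) (h w : Nat) : Prop :=
  t.length = h ∧ ∀ row ∈ t, row.length = w

-- ---- generic list lemmas ----
theorem pvFoldlFlagStay {σ α : Type} (step : (σ × Bool) → α → (σ × Bool))
    (hstay : ∀ s a, step (s, true) a = (s, true)) (xs : List α) (s : σ) :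
    xs.foldl step (s, true) = (s, true) := by
  induction xs with
  | nil => rfl
  | cons a t ih => simpa [List.foldl_cons, hstay] using ih


theorem pvFoldlBreak {σ α : Type} (step : (σ × Bool) → α → (σ × Bool))
    (p : σ → α → Bool) (f : α → σ)
    (hstay : ∀ s a, step (s, true) a = (s, true))
    (hstep : ∀ s a, step (s, false) a = if p s a then (f a, true) else (s, false))
    (xs : List α) (s0 : σ) :
    xs.foldl step (s0, false) =
      match xs.find? (p s0) with
      | some a => (f a, true)
      | none => (s0, false) := by
  induction xs with
  | nil => rfl
  | cons a t ih =>
    simp only [List.foldl_cons, List.find?_cons, hstep]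
    by_cases hpa : p s0 a
    · simp [hpa, pvFoldlFlagStay step hstay]
    · simp [hpa, ih]


theorem pvFindCongr {α : Type} (l : List α) (p q : α → Bool)
    (h : ∀ a ∈ l, p a = q a) : l.find? p = l.find? q := by
  induction l with
  | nil => rfl
  | cons a t ih =>
    simp only [List.find?_cons]
    rw [h a (List.mem_cons_self)]
    cases q a
    · exact ih fun b hb => h b (List.mem_cons_of_mem _ hb)
    · rfl

theorem pvFindDesc (P : Nat → Bool) (n cb : Nat) (hcb : cb ≤ n)
    (hfwd : ∀ e, 1 ≤ e → e ≤ n → P e = true → e ≤ cb)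
    (hP : 1 ≤ cb → P cb = true) :
    (List.range n).find? (fun k => P (n - k)) = if 1 ≤ cb then some (n - cb) else none := by
  induction n with
  | zero =>
    have : cb = 0 := Nat.le_zero.mp hcb
    simp [this]
  | succ n ih =>
    rw [List.range_succ_eq_map]
    simp only [List.find?_cons]
    cases hP0 : P (n + 1 - 0) with
    | true =>
      have hle : n + 1 ≤ cb := hfwd (n + 1) (by omega) le_rfl (by simpa using hP0)
      have hcbe : cb = n + 1 := le_antisymm hcb hle
      simp [hcbe]
    | false =>
      have hcb' : cb ≤ n := by
        by_contra hgt
        have hcbe : cb = n + 1 := by omega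
        have := hP (by omega)
        rw [hcbe] at this
        simp only [Nat.sub_zero] at hP0
        rw [this] at hP0
        exact Bool.true_eq_false.mp hP0
      have hfind : (List.map Nat.succ (List.range n)).find? (fun k => P (n + 1 - k)) =
          ((List.range n).find? (fun k => P (n - k))).map Nat.succ := by
        rw [List.find?_map]
        congr 1
        apply pvFindCongr
        intro a _
        simp only [Function.comp_apply]
        congr 1
        omega
      rw [hfind, ih hcb' (fun e h1 h2 hPe => hfwd e h1 (by omega) hPe)]
      by_cases h1 : 1 ≤ cb
      · simp only [if_pos h1, Option.map_some]
        congr 1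
        omega
      · simp [h1]


theorem pvFoldlCongrInv {σ α : Type} (l : List α) (Q : σ → Prop) (f g : σ → α → σ) (s0 : σ)
    (hq : Q s0) (hpres : ∀ s a, Q s → a ∈ l → Q (g s a))
    (heq : ∀ s a, Q s → a ∈ l → f s a = g s a) :
    l.foldl f s0 = l.foldl g s0 := by
  induction l generalizing s0 with
  | nil => rfl
  | cons a t ih =>
    simp only [List.foldl_cons]
    rw [heq s0 a hq (List.mem_cons_self), ih (g s0 a)
      (hpres s0 a hq (List.mem_cons_self))
      (fun s b hs hb => hpres s b hs (List.mem_cons_of_mem _ hb))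
      (fun s b hs hb => heq s b hs (List.mem_cons_of_mem _ hb))]


theorem pvFindSomeCongr {α β : Type} (l : List α) (f g : α → Option β)
    (h : ∀ a ∈ l, f a = g a) : l.findSome? f = l.findSome? g := by
  induction l with
  | nil => rfl
  | cons a t ih =>
    simp only [List.findSome?_cons]
    rw [h a (List.mem_cons_self)]
    cases g a with
    | none => exact ih fun b hb => h b (List.mem_cons_of_mem _ hb)
    | some v => rfl



theorem pvFindSomeFlatMap {α β γ : Type} (l : List α) (f : α → List β) (g : β → Option γ) :
    (l.flatMap f).findSome? g = l.findSome? fun x => (f x).findSome? g := by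
  induction l with
  | nil => rfl
  | cons a t ih =>
    simp only [List.flatMap_cons, List.findSome?_append, List.findSome?_cons, ih]
    cases (f a).findSome? g with
    | none => simp
    | some v => simp


theorem pvFindEqFindSome {α : Type} (l : List α) (p : α → Bool) :
    l.find? p = l.findSome? fun x => if p x then some x else none := by
  induction l with
  | nil => rfl
  | cons a t ih =>
    simp only [List.find?_cons, List.findSome?_cons]
    by_cases hpa : p a
    · simp [hpa]
    · simp [hpa, ih]


theorem pvFindSomeMap {α β γ : Type} (l : List α) (f : α → β) (g : β → Option γ) :
    (l.map f).findSome? g = l.findSome? (g ∘ f) := by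
  induction l with
  | nil => rfl
  | cons a t ih =>
    simp only [List.map_cons, List.findSome?_cons, Function.comp_apply]
    cases g (f a)
    · exact ih
    · rfl


theorem pvMapFindSome {α β γ : Type} (l : List α) (f : α → Option β) (g : β → γ) :
    (l.findSome? f).map g = l.findSome? fun a => (f a).map g := by
  induction l with
  | nil => rfl
  | cons a t ih =>
    simp only [List.findSome?_cons]
    cases f a
    · simpa using ih
    · rfl


-- ---- pvSet2 / pvCell basics ----
theorem pvShape_set2 {t : List (List Int)} {h w : Nat} (hs : pvShape t h w) (r c : Nat) (v : Int) :
    pvShape (pvSet2 t r c v) h w := by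
  obtain ⟨hl, hrows⟩ := hs
  constructor
  · simpa [pvSet2] using hl
  · intro row hrow
    simp only [pvSet2] at hrow
    rw [List.mem_iff_getElem?] at hrow
    obtain ⟨i, hi⟩ := hrow
    rw [List.getElem?_modify] at hi
    cases hti : t[i]? with
    | none => rw [hti] at hi; simp at hi
    | some trow =>
      have htm : trow ∈ t := List.mem_of_getElem? hti
      rw [hti] at hi
      by_cases hri : r = i
      · simp [hri] at hi
        rw [← hi]
        simpa using hrows _ htm
      · simp [hri] at hi
        rw [← hi]
        exact hrows _ htm


theorem pvCell_set2_self {t : List (List Int)} {r c : Nat} (v : Int)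
    (hr : r < t.length) (hc : c < (t.getD r []).length) :
    pvCell (pvSet2 t r c v) r c = v := by
  have hrow : t.getD r [] = t[r] := by
    simp [List.getD_eq_getElem?_getD, List.getElem?_eq_getElem hr]
  have hc' : c < t[r].length := by rw [← hrow]; exact hc
  simp only [pvCell, pvSet2, List.getD_eq_getElem?_getD, List.getElem?_modify,
    List.getElem?_eq_getElem hr]
  simp [hc']


theorem pvCell_set2_ne {t : List (List Int)} {r' c' r c : Nat} (v : Int)
    (hne : r ≠ r' ∨ c ≠ c') : pvCell (pvSet2 t r' c' v) r c = pvCell t r c := by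
  simp only [pvCell, pvSet2, List.getD_eq_getElem?_getD, List.getElem?_modify]
  by_cases hrr : r' = r
  · subst hrr
    rcases hne with hne | hne
    · exact absurd rfl hne
    · cases t[r']? with
      | none => rfl
      | some row =>
        simp only [if_true, Option.getD_some]
        simp [Ne.symm hne]
  · cases t[r]? with
    | none => simp [hrr]
    | some row => simp [hrr]

-- ---- the four table builders compute the run recurrences ----
-- row/column folds of the four builders, named for the proofs
def pvLTRrow (m : List (List Int)) (r n : Nat) (t : List (List Int)) : List (List Int) :=
  (List.range n).foldl (fun t i2 =>
    let column := i2 + 1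
    if pvCell m r column = 0 then pvSet2 t r column 0
    else pvSet2 t r column (pvCell t r (column - 1) + 1)) t

theorem pvShape_rowlen {t : List (List Int)} {h w : Nat} (hs : pvShape t h w) {r : Nat}
    (hr : r < h) : (t.getD r []).length = w := by
  obtain ⟨hl, hrows⟩ := hs
  have hr' : r < t.length := by omega
  have hget : t.getD r [] = t[r] := by
    simp [List.getD_eq_getElem?_getD, List.getElem?_eq_getElem hr']
  rw [hget]
  exact hrows _ (List.getElem_mem hr')

theorem pvLTRrow_spec (m : List (List Int)) (h w : Nat) (r : Nat) (hrh : r < h)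
    (n : Nat) (hn : n ≤ w - 1) (hw : 0 < w) (t : List (List Int)) (hs : pvShape t h w)
    (hseed : pvCell t r 0 = pvLtrS m r 0) :
    pvShape (pvLTRrow m r n t) h w ∧
    (∀ c, c ≤ n → pvCell (pvLTRrow m r n t) r c = pvLtrS m r c) ∧
    (∀ r' c', r' ≠ r ∨ n < c' → pvCell (pvLTRrow m r n t) r' c' = pvCell t r' c') := by
  induction n with
  | zero =>
    refine ⟨hs, ?_, fun r' c' _ => rfl⟩
    intro c hc
    interval_cases c
    exact hseed
  | succ n ih =>
    obtain ⟨ihs, ihv, ihf⟩ := ih (by omega)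
    have hfold : pvLTRrow m r (n + 1) t =
        (if pvCell m r (n + 1) = 0 then pvSet2 (pvLTRrow m r n t) r (n + 1) 0
         else pvSet2 (pvLTRrow m r n t) r (n + 1) (pvCell (pvLTRrow m r n t) r n + 1)) := by
      simp only [pvLTRrow, List.range_succ, List.foldl_append, List.foldl_cons, List.foldl_nil]
      rfl
    have hrlen : r < (pvLTRrow m r n t).length := by
      rw [ihs.1]; omega
    have hclen : n + 1 < ((pvLTRrow m r n t).getD r []).length := by
      rw [pvShape_rowlen ihs hrh]; omega
    constructor
    · rw [hfold]; split <;> exact pvShape_set2 ihs _ _ _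
    constructor
    · intro c hc
      rcases Nat.lt_succ_iff_lt_or_eq.mp (Nat.lt_succ_of_le hc) with hc' | rfl
      · have hle : c ≤ n := by omega
        rw [hfold]
        split <;> rw [pvCell_set2_ne _ (Or.inr (by omega))] <;> exact ihv c hle
      · rw [hfold, pvLtrS]
        by_cases hz : pvCell m r (n + 1) = 0
        · rw [if_pos hz, if_pos hz, pvCell_set2_self _ hrlen hclen]
        · rw [if_neg hz, if_neg hz, pvCell_set2_self _ hrlen hclen, ihv n le_rfl]
    · intro r' c' hd
      have hne : r' ≠ r ∨ c' ≠ n + 1 := by omega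
      rw [hfold]
      split <;> rw [pvCell_set2_ne _ hne] <;> exact ihf r' c' (by omega)

theorem pvBuildLTR_eq (m : List (List Int)) (h w : Nat) :
    pvBuildLTR m h w = (List.range h).foldl
      (fun t row => pvLTRrow m row (w - 1) (pvSet2 t row 0 (pvCell m row 0)))
      (List.replicate h (List.replicate w (0 : Int))) := rfl

theorem pvShape_replicate (h w : Nat) :
    pvShape (List.replicate h (List.replicate w (0 : Int))) h w := by
  constructor
  · simp
  · intro row hrow
    rw [List.eq_of_mem_replicate hrow]
    simp

theorem pvBuildLTR_spec (m : List (List Int)) (h w : Nat) (hw : 0 < w) :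
    pvShape (pvBuildLTR m h w) h w ∧
    ∀ r < h, ∀ c < w, pvCell (pvBuildLTR m h w) r c = pvLtrS m r c := by
  rw [pvBuildLTR_eq]
  have main : ∀ k ≤ h,
      pvShape ((List.range k).foldl
        (fun t row => pvLTRrow m row (w - 1) (pvSet2 t row 0 (pvCell m row 0)))
        (List.replicate h (List.replicate w (0 : Int)))) h w ∧
      ∀ r < k, ∀ c < w, pvCell ((List.range k).foldl
        (fun t row => pvLTRrow m row (w - 1) (pvSet2 t row 0 (pvCell m row 0)))
        (List.replicate h (List.replicate w (0 : Int)))) r c = pvLtrS m r c := by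
    intro k
    induction k with
    | zero => exact fun _ => ⟨pvShape_replicate h w, by omega⟩
    | succ k ih =>
      intro hk
      obtain ⟨ihs, ihv⟩ := ih (by omega)
      rw [List.range_succ, List.foldl_append, List.foldl_cons, List.foldl_nil]
      set tk := (List.range k).foldl
        (fun t row => pvLTRrow m row (w - 1) (pvSet2 t row 0 (pvCell m row 0)))
        (List.replicate h (List.replicate w (0 : Int))) with htk
      have hkh : k < h := by omega
      have hrlen : k < tk.length := by rw [ihs.1]; omega
      have hclen : (0 : Nat) < (tk.getD k []).length := by rw [pvShape_rowlen ihs hkh]; omega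
      have hs2 : pvShape (pvSet2 tk k 0 (pvCell m k 0)) h w := pvShape_set2 ihs _ _ _
      have hseed : pvCell (pvSet2 tk k 0 (pvCell m k 0)) k 0 = pvLtrS m k 0 := by
        rw [pvCell_set2_self _ hrlen hclen]; rfl
      obtain ⟨rs, rv, rf⟩ := pvLTRrow_spec m h w k hkh (w - 1) le_rfl hw _ hs2 hseed
      refine ⟨rs, ?_⟩
      intro r hr c hc
      rcases Nat.lt_succ_iff_lt_or_eq.mp hr with hr' | rfl
      · rw [rf r c (Or.inl (by omega)), pvCell_set2_ne _ (Or.inl (by omega))]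
        exact ihv r hr' c hc
      · exact rv c (by omega)
  exact ⟨(main h le_rfl).1, (main h le_rfl).2⟩

def pvRTLrow (m : List (List Int)) (w r n : Nat) (t : List (List Int)) : List (List Int) :=
  (List.range n).foldl (fun t i2 =>
    let column := w - 1 - (i2 + 1)
    if pvCell m r column = 0 then pvSet2 t r column 0
    else pvSet2 t r column (pvCell t r (column + 1) + 1)) t

theorem pvRtlS_last (m : List (List Int)) (w r : Nat) (hw : 0 < w) :
    pvRtlS m w r (w - 1) = pvCell m r (w - 1) := by
  rw [pvRtlS, dif_neg (by omega)]

theorem pvRTLrow_spec (m : List (List Int)) (h w : Nat) (r : Nat) (hrh : r < h)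
    (n : Nat) (hn : n ≤ w - 1) (hw : 0 < w) (t : List (List Int)) (hs : pvShape t h w)
    (hseed : pvCell t r (w - 1) = pvRtlS m w r (w - 1)) :
    pvShape (pvRTLrow m w r n t) h w ∧
    (∀ c, w - 1 - n ≤ c → c < w → pvCell (pvRTLrow m w r n t) r c = pvRtlS m w r c) ∧
    (∀ r' c', r' ≠ r ∨ c' < w - 1 - n → pvCell (pvRTLrow m w r n t) r' c' = pvCell t r' c') := by
  induction n with
  | zero =>
    refine ⟨hs, ?_, fun r' c' _ => rfl⟩
    intro c hc1 hc2
    have : c = w - 1 := by omega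
    rw [this]
    exact hseed
  | succ n ih =>
    obtain ⟨ihs, ihv, ihf⟩ := ih (by omega)
    have hcol : w - 1 - (n + 1) = w - 2 - n := by omega
    have hfold : pvRTLrow m w r (n + 1) t =
        (if pvCell m r (w - 2 - n) = 0 then pvSet2 (pvRTLrow m w r n t) r (w - 2 - n) 0
         else pvSet2 (pvRTLrow m w r n t) r (w - 2 - n)
           (pvCell (pvRTLrow m w r n t) r (w - 2 - n + 1) + 1)) := by
      simp only [pvRTLrow, List.range_succ, List.foldl_append, List.foldl_cons, List.foldl_nil, hcol]
    have hrlen : r < (pvRTLrow m w r n t).length := by rw [ihs.1]; omega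
    have hclen : w - 2 - n < ((pvRTLrow m w r n t).getD r []).length := by
      rw [pvShape_rowlen ihs hrh]; omega
    have hrec : pvCell (pvRTLrow m w r n t) r (w - 2 - n + 1) = pvRtlS m w r (w - 2 - n + 1) := by
      exact ihv _ (by omega) (by omega)
    constructor
    · rw [hfold]; split <;> exact pvShape_set2 ihs _ _ _
    constructor
    · intro c hc1 hc2
      by_cases hcc : c = w - 2 - n
      · subst hcc
        rw [hfold]
        have hstep : pvRtlS m w r (w - 2 - n) =
            (if pvCell m r (w - 2 - n) = 0 then 0 else pvRtlS m w r (w - 2 - n + 1) + 1) := by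
          rw [pvRtlS, dif_pos (by omega)]
        by_cases hz : pvCell m r (w - 2 - n) = 0
        · rw [if_pos hz, pvCell_set2_self _ hrlen hclen, hstep, if_pos hz]
        · rw [if_neg hz, pvCell_set2_self _ hrlen hclen, hstep, if_neg hz, hrec]
      · have : w - 1 - n ≤ c := by omega
        rw [hfold]
        split <;> rw [pvCell_set2_ne _ (Or.inr hcc)] <;> exact ihv c this hc2
    · intro r' c' hd
      have hne : r' ≠ r ∨ c' ≠ w - 2 - n := by omega
      rw [hfold]
      split <;> rw [pvCell_set2_ne _ hne] <;> exact ihf r' c' (by omega)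

def pvTTBcol (m : List (List Int)) (c n : Nat) (t : List (List Int)) : List (List Int) :=
  (List.range n).foldl (fun t i2 =>
    let row := i2 + 1
    if pvCell m row c = 0 then pvSet2 t row c 0
    else pvSet2 t row c (pvCell t (row - 1) c + 1)) t

theorem pvTTBcol_spec (m : List (List Int)) (h w : Nat) (c : Nat) (hcw : c < w)
    (n : Nat) (hn : n ≤ h - 1) (hh : 0 < h) (t : List (List Int)) (hs : pvShape t h w)
    (hseed : pvCell t 0 c = pvTtbS m c 0) :
    pvShape (pvTTBcol m c n t) h w ∧
    (∀ r, r ≤ n → pvCell (pvTTBcol m c n t) r c = pvTtbS m c r) ∧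
    (∀ r' c', c' ≠ c ∨ n < r' → pvCell (pvTTBcol m c n t) r' c' = pvCell t r' c') := by
  induction n with
  | zero =>
    refine ⟨hs, ?_, fun r' c' _ => rfl⟩
    intro r hr
    interval_cases r
    exact hseed
  | succ n ih =>
    obtain ⟨ihs, ihv, ihf⟩ := ih (by omega)
    have hfold : pvTTBcol m c (n + 1) t =
        (if pvCell m (n + 1) c = 0 then pvSet2 (pvTTBcol m c n t) (n + 1) c 0
         else pvSet2 (pvTTBcol m c n t) (n + 1) c (pvCell (pvTTBcol m c n t) n c + 1)) := by
      simp only [pvTTBcol, List.range_succ, List.foldl_append, List.foldl_cons, List.foldl_nil]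
      rfl
    have hrlen : n + 1 < (pvTTBcol m c n t).length := by rw [ihs.1]; omega
    have hclen : c < ((pvTTBcol m c n t).getD (n + 1) []).length := by
      rw [pvShape_rowlen ihs (show n + 1 < h by omega)]; omega
    constructor
    · rw [hfold]; split <;> exact pvShape_set2 ihs _ _ _
    constructor
    · intro r hr
      rcases Nat.lt_succ_iff_lt_or_eq.mp (Nat.lt_succ_of_le hr) with hr' | rfl
      · have hle : r ≤ n := by omega
        rw [hfold]
        split <;> rw [pvCell_set2_ne _ (Or.inl (by omega))] <;> exact ihv r hle
      · rw [hfold, pvTtbS]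
        by_cases hz : pvCell m (n + 1) c = 0
        · rw [if_pos hz, if_pos hz, pvCell_set2_self _ hrlen hclen]
        · rw [if_neg hz, if_neg hz, pvCell_set2_self _ hrlen hclen, ihv n le_rfl]
    · intro r' c' hd
      have hne : r' ≠ n + 1 ∨ c' ≠ c := by omega
      rw [hfold]
      split <;> rw [pvCell_set2_ne _ hne] <;> exact ihf r' c' (by omega)

def pvBTTcol (m : List (List Int)) (h c n : Nat) (t : List (List Int)) : List (List Int) :=
  (List.range n).foldl (fun t i2 =>
    let row := h - 1 - (i2 + 1)
    if pvCell m row c = 0 then pvSet2 t row c 0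
    else pvSet2 t row c (pvCell t (row + 1) c + 1)) t

theorem pvBttS_last (m : List (List Int)) (h c : Nat) (hh : 0 < h) :
    pvBttS m h (h - 1) c = pvCell m (h - 1) c := by
  rw [pvBttS, dif_neg (by omega)]

theorem pvBTTcol_spec (m : List (List Int)) (h w : Nat) (c : Nat) (hcw : c < w)
    (n : Nat) (hn : n ≤ h - 1) (hh : 0 < h) (t : List (List Int)) (hs : pvShape t h w)
    (hseed : pvCell t (h - 1) c = pvBttS m h (h - 1) c) :
    pvShape (pvBTTcol m h c n t) h w ∧
    (∀ r, h - 1 - n ≤ r → r < h → pvCell (pvBTTcol m h c n t) r c = pvBttS m h r c) ∧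
    (∀ r' c', c' ≠ c ∨ r' < h - 1 - n → pvCell (pvBTTcol m h c n t) r' c' = pvCell t r' c') := by
  induction n with
  | zero =>
    refine ⟨hs, ?_, fun r' c' _ => rfl⟩
    intro r hr1 hr2
    have : r = h - 1 := by omega
    rw [this]
    exact hseed
  | succ n ih =>
    obtain ⟨ihs, ihv, ihf⟩ := ih (by omega)
    have hrow : h - 1 - (n + 1) = h - 2 - n := by omega
    have hfold : pvBTTcol m h c (n + 1) t =
        (if pvCell m (h - 2 - n) c = 0 then pvSet2 (pvBTTcol m h c n t) (h - 2 - n) c 0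
         else pvSet2 (pvBTTcol m h c n t) (h - 2 - n) c
           (pvCell (pvBTTcol m h c n t) (h - 2 - n + 1) c + 1)) := by
      simp only [pvBTTcol, List.range_succ, List.foldl_append, List.foldl_cons, List.foldl_nil, hrow]
    have hrlen : h - 2 - n < (pvBTTcol m h c n t).length := by rw [ihs.1]; omega
    have hclen : c < ((pvBTTcol m h c n t).getD (h - 2 - n) []).length := by
      rw [pvShape_rowlen ihs (show h - 2 - n < h by omega)]; omega
    have hrec : pvCell (pvBTTcol m h c n t) (h - 2 - n + 1) c = pvBttS m h (h - 2 - n + 1) c := by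
      exact ihv _ (by omega) (by omega)
    constructor
    · rw [hfold]; split <;> exact pvShape_set2 ihs _ _ _
    constructor
    · intro r hr1 hr2
      by_cases hrr : r = h - 2 - n
      · subst hrr
        rw [hfold]
        have hstep : pvBttS m h (h - 2 - n) c =
            (if pvCell m (h - 2 - n) c = 0 then 0 else pvBttS m h (h - 2 - n + 1) c + 1) := by
          rw [pvBttS, dif_pos (by omega)]
        by_cases hz : pvCell m (h - 2 - n) c = 0
        · rw [if_pos hz, pvCell_set2_self _ hrlen hclen, hstep, if_pos hz]
        · rw [if_neg hz, pvCell_set2_self _ hrlen hclen, hstep, if_neg hz, hrec]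
      · have : h - 1 - n ≤ r := by omega
        rw [hfold]
        split <;> rw [pvCell_set2_ne _ (Or.inl hrr)] <;> exact ihv r this hr2
    · intro r' c' hd
      have hne : r' ≠ h - 2 - n ∨ c' ≠ c := by omega
      rw [hfold]
      split <;> rw [pvCell_set2_ne _ hne] <;> exact ihf r' c' (by omega)

theorem pvBuildRTL_spec (m : List (List Int)) (h w : Nat) (hw : 0 < w) :
    pvShape (pvBuildRTL m h w) h w ∧
    ∀ r < h, ∀ c < w, pvCell (pvBuildRTL m h w) r c = pvRtlS m w r c := by
  have hbe : pvBuildRTL m h w = (List.range h).foldl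
      (fun t row => pvRTLrow m w row (w - 1) (pvSet2 t row (w - 1) (pvCell m row (w - 1))))
      (List.replicate h (List.replicate w (0 : Int))) := rfl
  rw [hbe]
  have main : ∀ k ≤ h,
      pvShape ((List.range k).foldl
        (fun t row => pvRTLrow m w row (w - 1) (pvSet2 t row (w - 1) (pvCell m row (w - 1))))
        (List.replicate h (List.replicate w (0 : Int)))) h w ∧
      ∀ r < k, ∀ c < w, pvCell ((List.range k).foldl
        (fun t row => pvRTLrow m w row (w - 1) (pvSet2 t row (w - 1) (pvCell m row (w - 1))))
        (List.replicate h (List.replicate w (0 : Int)))) r c = pvRtlS m w r c := by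
    intro k
    induction k with
    | zero => exact fun _ => ⟨pvShape_replicate h w, by omega⟩
    | succ k ih =>
      intro hk
      obtain ⟨ihs, ihv⟩ := ih (by omega)
      rw [List.range_succ, List.foldl_append, List.foldl_cons, List.foldl_nil]
      set tk := (List.range k).foldl
        (fun t row => pvRTLrow m w row (w - 1) (pvSet2 t row (w - 1) (pvCell m row (w - 1))))
        (List.replicate h (List.replicate w (0 : Int))) with htk
      have hkh : k < h := by omega
      have hrlen : k < tk.length := by rw [ihs.1]; omega
      have hclen : w - 1 < (tk.getD k []).length := by rw [pvShape_rowlen ihs hkh]; omega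
      have hs2 : pvShape (pvSet2 tk k (w - 1) (pvCell m k (w - 1))) h w := pvShape_set2 ihs _ _ _
      have hseed : pvCell (pvSet2 tk k (w - 1) (pvCell m k (w - 1))) k (w - 1) = pvRtlS m w k (w - 1) := by
        rw [pvCell_set2_self _ hrlen hclen, pvRtlS_last m w k hw]
      obtain ⟨rs, rv, rf⟩ := pvRTLrow_spec m h w k hkh (w - 1) le_rfl hw _ hs2 hseed
      refine ⟨rs, ?_⟩
      intro r hr c hc
      rcases Nat.lt_succ_iff_lt_or_eq.mp hr with hr' | rfl
      · rw [rf r c (Or.inl (by omega)), pvCell_set2_ne _ (Or.inl (by omega))]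
        exact ihv r hr' c hc
      · exact rv c (by omega) hc
  exact ⟨(main h le_rfl).1, (main h le_rfl).2⟩

theorem pvBuildTTB_spec (m : List (List Int)) (h w : Nat) (hh : 0 < h) :
    pvShape (pvBuildTTB m h w) h w ∧
    ∀ r < h, ∀ c < w, pvCell (pvBuildTTB m h w) r c = pvTtbS m c r := by
  have hbe : pvBuildTTB m h w = (List.range w).foldl
      (fun t column => pvTTBcol m column (h - 1) (pvSet2 t 0 column (pvCell m 0 column)))
      (List.replicate h (List.replicate w (0 : Int))) := rfl
  rw [hbe]
  have main : ∀ k ≤ w,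
      pvShape ((List.range k).foldl
        (fun t column => pvTTBcol m column (h - 1) (pvSet2 t 0 column (pvCell m 0 column)))
        (List.replicate h (List.replicate w (0 : Int)))) h w ∧
      ∀ r < h, ∀ c < k, pvCell ((List.range k).foldl
        (fun t column => pvTTBcol m column (h - 1) (pvSet2 t 0 column (pvCell m 0 column)))
        (List.replicate h (List.replicate w (0 : Int)))) r c = pvTtbS m c r := by
    intro k
    induction k with
    | zero => exact fun _ => ⟨pvShape_replicate h w, by omega⟩
    | succ k ih =>
      intro hk
      obtain ⟨ihs, ihv⟩ := ih (by omega)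
      rw [List.range_succ, List.foldl_append, List.foldl_cons, List.foldl_nil]
      set tk := (List.range k).foldl
        (fun t column => pvTTBcol m column (h - 1) (pvSet2 t 0 column (pvCell m 0 column)))
        (List.replicate h (List.replicate w (0 : Int))) with htk
      have hkw : k < w := by omega
      have hrlen : (0 : Nat) < tk.length := by rw [ihs.1]; omega
      have hclen : k < (tk.getD 0 []).length := by rw [pvShape_rowlen ihs (show 0 < h by omega)]; omega
      have hs2 : pvShape (pvSet2 tk 0 k (pvCell m 0 k)) h w := pvShape_set2 ihs _ _ _
      have hseed : pvCell (pvSet2 tk 0 k (pvCell m 0 k)) 0 k = pvTtbS m k 0 := by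
        rw [pvCell_set2_self _ hrlen hclen]; rfl
      obtain ⟨rs, rv, rf⟩ := pvTTBcol_spec m h w k hkw (h - 1) le_rfl hh _ hs2 hseed
      refine ⟨rs, ?_⟩
      intro r hr c hc
      rcases Nat.lt_succ_iff_lt_or_eq.mp hc with hc' | rfl
      · rw [rf r c (Or.inl (by omega)), pvCell_set2_ne _ (Or.inr (by omega))]
        exact ihv r hr c hc'
      · exact rv r (by omega)
  exact ⟨(main w le_rfl).1, fun r hr c hc => (main w le_rfl).2 r hr c hc⟩

theorem pvBuildBTT_spec (m : List (List Int)) (h w : Nat) (hh : 0 < h) :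
    pvShape (pvBuildBTT m h w) h w ∧
    ∀ r < h, ∀ c < w, pvCell (pvBuildBTT m h w) r c = pvBttS m h r c := by
  have hbe : pvBuildBTT m h w = (List.range w).foldl
      (fun t column => pvBTTcol m h column (h - 1) (pvSet2 t (h - 1) column (pvCell m (h - 1) column)))
      (List.replicate h (List.replicate w (0 : Int))) := rfl
  rw [hbe]
  have main : ∀ k ≤ w,
      pvShape ((List.range k).foldl
        (fun t column => pvBTTcol m h column (h - 1) (pvSet2 t (h - 1) column (pvCell m (h - 1) column)))
        (List.replicate h (List.replicate w (0 : Int)))) h w ∧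
      ∀ r < h, ∀ c < k, pvCell ((List.range k).foldl
        (fun t column => pvBTTcol m h column (h - 1) (pvSet2 t (h - 1) column (pvCell m (h - 1) column)))
        (List.replicate h (List.replicate w (0 : Int)))) r c = pvBttS m h r c := by
    intro k
    induction k with
    | zero => exact fun _ => ⟨pvShape_replicate h w, by omega⟩
    | succ k ih =>
      intro hk
      obtain ⟨ihs, ihv⟩ := ih (by omega)
      rw [List.range_succ, List.foldl_append, List.foldl_cons, List.foldl_nil]
      set tk := (List.range k).foldl
        (fun t column => pvBTTcol m h column (h - 1) (pvSet2 t (h - 1) column (pvCell m (h - 1) column)))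
        (List.replicate h (List.replicate w (0 : Int))) with htk
      have hkw : k < w := by omega
      have hrlen : h - 1 < tk.length := by rw [ihs.1]; omega
      have hclen : k < (tk.getD (h - 1) []).length := by
        rw [pvShape_rowlen ihs (show h - 1 < h by omega)]; omega
      have hs2 : pvShape (pvSet2 tk (h - 1) k (pvCell m (h - 1) k)) h w := pvShape_set2 ihs _ _ _
      have hseed : pvCell (pvSet2 tk (h - 1) k (pvCell m (h - 1) k)) (h - 1) k = pvBttS m h (h - 1) k := by
        rw [pvCell_set2_self _ hrlen hclen, pvBttS_last m h k hh]
      obtain ⟨rs, rv, rf⟩ := pvBTTcol_spec m h w k hkw (h - 1) le_rfl hh _ hs2 hseed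
      refine ⟨rs, ?_⟩
      intro r hr c hc
      rcases Nat.lt_succ_iff_lt_or_eq.mp hc with hc' | rfl
      · rw [rf r c (Or.inl (by omega)), pvCell_set2_ne _ (Or.inr (by omega))]
        exact ihv r hr c hc'
      · exact rv r (by omega) hr
  exact ⟨(main w le_rfl).1, fun r hr c hc => (main w le_rfl).2 r hr c hc⟩

-- ---- facts about pvCB ----
theorem pvValidB_iff {m : List (List Int)} {s r c : Nat} :
    pvValidB m s r c = true ↔
      (1 ≤ s ∧ r + s ≤ pvH m ∧ c + s ≤ pvW m ∧
       (s : Int) ≤ pvRtlS m (pvW m) r c ∧ (s : Int) ≤ pvBttS m (pvH m) r c ∧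
       (s : Int) ≤ pvLtrS m (r + s - 1) (c + s - 1) ∧
       (s : Int) ≤ pvTtbS m (c + s - 1) (r + s - 1)) := by
  simp [pvValidB, Bool.and_eq_true, decide_eq_true_eq, and_assoc]

theorem pvCB_valid {m : List (List Int)} {r c : Nat} (h : 0 < pvCB m r c) :
    pvValidB m (pvCB m r c) r c = true := by
  unfold pvCB at h ⊢
  obtain ⟨k, hk0, hkn, hkP⟩ := Nat.findGreatest_pos.mp h
  exact Nat.findGreatest_spec (P := fun s => pvValidB m s r c = true) hkn hkP

theorem pvCB_le_of_valid {m : List (List Int)} {s r c : Nat} (h : pvValidB m s r c = true) :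
    s ≤ pvCB m r c := by
  have hv := pvValidB_iff.mp h
  unfold pvCB
  exact Nat.le_findGreatest (by omega) h

theorem pvScanCell_break (ltr ttb : List (List Int)) (h w : Nat) (L : Int)
    (st : Int × Int × Int) (row column : Nat) :
    ((PySem.List.pyRange 0 L 1).foldl
      (fun (st2 : (Int × Int × Int) × Bool) i =>
        if st2.2 then st2 else
        if (row : Int) + (L - i) - 1 < (h : Int) ∧ (column : Int) + (L - i) - 1 < (w : Int) then
          if min (pvCell ltr ((row : Int) + (L - i) - 1).toNat ((column : Int) + (L - i) - 1).toNat)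
               (pvCell ttb ((row : Int) + (L - i) - 1).toNat ((column : Int) + (L - i) - 1).toNat) ≥ L - i ∧
             L - i > st2.1.1 then
            ((L - i, (row : Int), (column : Int)), true)
          else st2
        else st2) (st, false)).1 =
    (match (PySem.List.pyRange 0 L 1).find? (fun i =>
        decide ((row : Int) + (L - i) - 1 < (h : Int) ∧ (column : Int) + (L - i) - 1 < (w : Int)) &&
        decide (min (pvCell ltr ((row : Int) + (L - i) - 1).toNat ((column : Int) + (L - i) - 1).toNat)
               (pvCell ttb ((row : Int) + (L - i) - 1).toNat ((column : Int) + (L - i) - 1).toNat) ≥ L - i ∧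
             L - i > st.1)) with
     | some i => (L - i, (row : Int), (column : Int))
     | none => st) := by
  rw [pvFoldlBreak _
    (p := fun (s : Int × Int × Int) i =>
        decide ((row : Int) + (L - i) - 1 < (h : Int) ∧ (column : Int) + (L - i) - 1 < (w : Int)) &&
        decide (min (pvCell ltr ((row : Int) + (L - i) - 1).toNat ((column : Int) + (L - i) - 1).toNat)
               (pvCell ttb ((row : Int) + (L - i) - 1).toNat ((column : Int) + (L - i) - 1).toNat) ≥ L - i ∧
             L - i > s.1))
    (f := fun i => ((L - i, (row : Int), (column : Int))))
    (fun s a => rfl)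
    (fun s a => by
      simp only [Bool.and_eq_true, decide_eq_true_eq]
      split_ifs <;> first | rfl | tauto)]
  cases (PySem.List.pyRange 0 L 1).find? _ <;> rfl

-- ---- A's per-cell inner loop is the canonical step ----
theorem pvScanCell_eq {m : List (List Int)}
    (st : Int × Int × Int) (hst : 0 ≤ st.1) {r c : Nat} (hr : r < pvH m) (hc : c < pvW m)
    (hw : 0 < pvW m) (hh : 0 < pvH m) :
    pvScanCell (pvBuildLTR m (pvH m) (pvW m)) (pvBuildRTL m (pvH m) (pvW m))
      (pvBuildTTB m (pvH m) (pvW m)) (pvBuildBTT m (pvH m) (pvW m)) (pvH m) (pvW m) st r c =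
    pvCStep m st (r, c) := by
  obtain ⟨sL, vL⟩ := pvBuildLTR_spec m (pvH m) (pvW m) hw
  obtain ⟨sR, vR⟩ := pvBuildRTL_spec m (pvH m) (pvW m) hw
  obtain ⟨sT, vT⟩ := pvBuildTTB_spec m (pvH m) (pvW m) hh
  obtain ⟨sB, vB⟩ := pvBuildBTT_spec m (pvH m) (pvW m) hh
  simp only [pvScanCell]
  rw [pvScanCell_break]
  rw [vR r hr c hc, vB r hr c hc]
  set L := min (pvRtlS m (pvW m) r c) (pvBttS m (pvH m) r c) with hLdef
  set cb := pvCB m r c with hcbdef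
  have hvalid_leL : ∀ e : Nat, pvValidB m e r c = true → (e : Int) ≤ L := by
    intro e hv
    obtain ⟨_, _, _, h4, h5, _, _⟩ := pvValidB_iff.mp hv
    rw [hLdef, le_min_iff]
    exact ⟨h4, h5⟩
  set n := L.toNat with hndef
  rw [PySem.List.pyRange_one]
  rw [List.find?_map]
  have hsub : (L - 0).toNat = n := by omega
  rw [hsub]
  have hcongr : ((List.range n).find? ((fun i =>
      decide ((r : Int) + (L - i) - 1 < (pvH m : Int) ∧ (c : Int) + (L - i) - 1 < (pvW m : Int)) &&
      decide (min (pvCell (pvBuildLTR m (pvH m) (pvW m)) ((r : Int) + (L - i) - 1).toNat ((c : Int) + (L - i) - 1).toNat)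
             (pvCell (pvBuildTTB m (pvH m) (pvW m)) ((r : Int) + (L - i) - 1).toNat ((c : Int) + (L - i) - 1).toNat) ≥ L - i ∧
           L - i > st.1)) ∘ (fun k : Nat => (0 : Int) + k))) =
      ((List.range n).find? (fun k => pvValidB m (n - k) r c && decide (st.1 < ((n - k : Nat) : Int)))) := by
    apply pvFindCongr
    intro k hk
    rw [List.mem_range] at hk
    have hnL : (n : Int) = L := by omega
    set e := n - k with hedef
    have he1 : 1 ≤ e := by omega
    have heL : (e : Int) = L - (0 + (k : Int)) := by omega
    have heL' : (e : Int) ≤ L := by omega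
    simp only [Function.comp_apply, ← heL]
    rcases Bool.eq_false_or_eq_true (pvValidB m e r c) with hv | hv
    · -- valid: both sides reduce to the e > st.1 test
      rw [hv]
      simp only [Bool.true_and]
      obtain ⟨h1, h2, h3, h4, h5, h6, h7⟩ := pvValidB_iff.mp hv
      have hbnd : (r : Int) + e - 1 < (pvH m : Int) ∧ (c : Int) + e - 1 < (pvW m : Int) := by
        constructor <;> omega
      have htn1 : ((r : Int) + e - 1).toNat = r + e - 1 := by omega
      have htn2 : ((c : Int) + e - 1).toNat = c + e - 1 := by omega
      rw [decide_eq_true hbnd, Bool.true_and, htn1, htn2,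
        vL (r + e - 1) (by omega) (c + e - 1) (by omega),
        vT (r + e - 1) (by omega) (c + e - 1) (by omega)]
      have : ((e : Int) ≤ min (pvLtrS m (r + e - 1) (c + e - 1)) (pvTtbS m (c + e - 1) (r + e - 1)) ∧
           (e : Int) > st.1) ↔ (st.1 < (e : Int)) := by
        rw [le_min_iff]
        constructor
        · exact fun h => h.2
        · exact fun h => ⟨⟨h6, h7⟩, h⟩
      rw [decide_eq_decide.mpr this]
    · -- invalid: both sides false
      rw [hv]
      simp only [Bool.false_and]
      rw [Bool.and_eq_false_iff]
      by_cases hbnd : (r : Int) + e - 1 < (pvH m : Int) ∧ (c : Int) + e - 1 < (pvW m : Int)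
      · right
        simp only [decide_eq_false_iff_not, not_and, not_lt]
        intro hmin
        have hre : r + e ≤ pvH m := by omega
        have hce : c + e ≤ pvW m := by omega
        have htn1 : ((r : Int) + e - 1).toNat = r + e - 1 := by omega
        have htn2 : ((c : Int) + e - 1).toNat = c + e - 1 := by omega
        rw [htn1, htn2, vL (r + e - 1) (by omega) (c + e - 1) (by omega),
          vT (r + e - 1) (by omega) (c + e - 1) (by omega), ge_iff_le, le_min_iff] at hmin
        have hrb : (e : Int) ≤ pvRtlS m (pvW m) r c ∧ (e : Int) ≤ pvBttS m (pvH m) r c := by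
          rw [← le_min_iff, ← hLdef]
          exact heL'
        have : pvValidB m e r c = true :=
          pvValidB_iff.mpr ⟨he1, hre, hce, hrb.1, hrb.2, hmin.1, hmin.2⟩
        rw [this] at hv
        exact absurd hv (by simp)
      · left
        simpa using hbnd
  rw [hcongr]
  set cbQ : Nat := if st.1 < (cb : Int) then cb else 0 with hcbQ
  have hcbn : cbQ ≤ n := by
    rw [hcbQ]
    split
    · rename_i hlt
      have hpos : 0 < cb := by omega
      have := hvalid_leL cb (pvCB_valid (by omega))
      omega
    · omega
  have hfwd : ∀ e, 1 ≤ e → e ≤ n → (pvValidB m e r c && decide (st.1 < ((e : Nat) : Int))) = true → e ≤ cbQ := by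
    intro e he1 hen hQ
    rw [Bool.and_eq_true, decide_eq_true_eq] at hQ
    obtain ⟨hv, hlt⟩ := hQ
    have hle : e ≤ cb := pvCB_le_of_valid hv
    have : st.1 < (cb : Int) := by
      have : (e : Int) ≤ cb := by exact_mod_cast hle
      omega
    rw [hcbQ, if_pos this]
    exact hle
  have hPQ : 1 ≤ cbQ → (pvValidB m cbQ r c && decide (st.1 < ((cbQ : Nat) : Int))) = true := by
    intro h1
    have hlt : st.1 < (cb : Int) := by
      by_contra hn'
      rw [hcbQ, if_neg hn'] at h1
      omega
    rw [hcbQ, if_pos hlt] at h1 ⊢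
    rw [Bool.and_eq_true, decide_eq_true_eq]
    exact ⟨pvCB_valid (by omega), hlt⟩
  have hfd := pvFindDesc (fun e => pvValidB m e r c && decide (st.1 < ((e : Nat) : Int))) n cbQ hcbn hfwd hPQ
  rw [hfd]
  by_cases h1 : 1 ≤ cbQ
  · rw [if_pos h1]
    have hlt : st.1 < (cb : Int) := by
      by_contra hn'
      rw [hcbQ, if_neg hn'] at h1
      omega
    have hcbQcb : cbQ = cb := by rw [hcbQ, if_pos hlt]
    simp only [Option.map_some]
    have hnL : (n : Int) = L := by
      have hpos : 0 < cb := by omega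
      have := hvalid_leL cb (pvCB_valid hpos)
      omega
    have hval : L - ((0 : Int) + ((n - cbQ : Nat) : Int)) = (cb : Int) := by
      omega
    rw [pvCStep, if_pos (by omega)]
    simp only [hval]
    rw [hcbdef]
  · rw [if_neg h1]
    simp only [Option.map_none]
    rw [pvCStep, if_neg (by
      rw [hcbQ] at h1
      by_cases hlt : st.1 < (cb : Int)
      · rw [if_pos hlt] at h1; omega
      · omega)]

-- ---- the canonical fold over any cell list ----
theorem pvCanonFold (m : List (List Int)) (P : List (Nat × Nat)) :
    (pvMOf m P = 0 ∧ P.find? (pvPred m P) = none ∧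
      P.foldl (pvCStep m) (0, -1, -1) = (0, -1, -1)) ∨
    (0 < pvMOf m P ∧ ∃ q0, P.find? (pvPred m P) = some q0 ∧
      pvCB m q0.1 q0.2 = pvMOf m P ∧
      P.foldl (pvCStep m) (0, -1, -1) = ((pvMOf m P : Int), (q0.1 : Int), (q0.2 : Int))) := by
  induction P using List.reverseRecOn with
  | nil => left; exact ⟨rfl, rfl, rfl⟩
  | append_singleton P q ih =>
    have hM' : pvMOf m (P ++ [q]) = max (pvMOf m P) (pvCB m q.1 q.2) := by
      simp [pvMOf, List.foldl_append]
    have hfold' : (P ++ [q]).foldl (pvCStep m) (0, -1, -1) =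
        pvCStep m (P.foldl (pvCStep m) (0, -1, -1)) q := by
      simp [List.foldl_append]
    have hbound : ∀ x ∈ P, pvCB m x.1 x.2 ≤ pvMOf m P :=
      (PySem.List.le_foldl_max_nat P (fun q' => pvCB m q'.1 q'.2) 0).2
    by_cases hcase : pvCB m q.1 q.2 ≤ pvMOf m P
    · -- maximum unchanged
      have hMeq : pvMOf m (P ++ [q]) = pvMOf m P := by omega
      have hpred : pvPred m (P ++ [q]) = pvPred m P := by
        funext x
        simp [pvPred, hMeq]
      rcases ih with ⟨hM0, hfnone, hfval⟩ | ⟨hMpos, q0, hfsome, hq0, hfval⟩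
      · left
        have hcb0 : pvCB m q.1 q.2 = 0 := by omega
        refine ⟨by omega, ?_, ?_⟩
        · rw [hpred, List.find?_append, hfnone]
          simp [pvPred, hcb0, hM0]
        · rw [hfold', hfval, pvCStep, hcb0]
          simp
      · right
        refine ⟨by omega, q0, ?_, by omega, ?_⟩
        · rw [hpred, List.find?_append, hfsome]
          rfl
        · rw [hfold', hfval, pvCStep]
          rw [if_neg (by omega)]
          rw [hMeq]
    · -- new maximum at q
      have hlt : pvMOf m P < pvCB m q.1 q.2 := by omega
      have hMeq : pvMOf m (P ++ [q]) = pvCB m q.1 q.2 := by omega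
      right
      refine ⟨by omega, q, ?_, by omega, ?_⟩
      · rw [List.find?_append]
        have hnone : P.find? (pvPred m (P ++ [q])) = none := by
          rw [List.find?_eq_none]
          intro x hx
          have := hbound x hx
          simp only [pvPred, decide_eq_true_eq, hMeq]
          omega
        rw [hnone]
        simp [pvPred, hMeq]
        omega
      · have hst1 : (P.foldl (pvCStep m) (0, -1, -1)).1 = (pvMOf m P : Int) := by
          rcases ih with ⟨hM0, _, hfval⟩ | ⟨_, q0, _, _, hfval⟩
          · rw [hfval, hM0]; rfl
          · rw [hfval]
        rw [hfold', pvCStep, if_pos (by rw [hst1]; omega), hMeq]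

theorem pvCells_mem {m : List (List Int)} {q : Nat × Nat} :
    q ∈ pvCells m ↔ q.1 < pvH m ∧ q.2 < pvW m := by
  obtain ⟨r, c⟩ := q
  simp [pvCells, List.mem_flatMap, List.mem_map, List.mem_range]

-- ---- port A computes the canonical fold ----
theorem pvPortA_eq {m0 : List Int} {rest : List (List Int)}
    (hw : m0.length ≠ 0) :
    findLargestSquareSurroundedByOne (m0 :: rest) =
      some ((pvCells (m0 :: rest)).foldl (pvCStep (m0 :: rest)) (0, -1, -1)) := by
  have hw0 : 0 < pvW (m0 :: rest) := by
    simp only [pvW, List.headD_cons]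
    omega
  have hh0 : 0 < pvH (m0 :: rest) := by simp [pvH]
  show (if m0.length = 0 then none else _) = _
  rw [if_neg hw]
  congr 1
  -- flatten the double loop into a fold over the cell list
  have hflat : (pvCells (m0 :: rest)).foldl
      (fun st q => pvScanCell (pvBuildLTR (m0 :: rest) (m0 :: rest).length m0.length)
        (pvBuildRTL (m0 :: rest) (m0 :: rest).length m0.length)
        (pvBuildTTB (m0 :: rest) (m0 :: rest).length m0.length)
        (pvBuildBTT (m0 :: rest) (m0 :: rest).length m0.length)
        (m0 :: rest).length m0.length st q.1 q.2) ((0 : Int), (-1 : Int), (-1 : Int)) =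
      (List.range (m0 :: rest).length).foldl (fun st row =>
        (List.range m0.length).foldl (fun st column =>
          pvScanCell (pvBuildLTR (m0 :: rest) (m0 :: rest).length m0.length)
            (pvBuildRTL (m0 :: rest) (m0 :: rest).length m0.length)
            (pvBuildTTB (m0 :: rest) (m0 :: rest).length m0.length)
            (pvBuildBTT (m0 :: rest) (m0 :: rest).length m0.length)
            (m0 :: rest).length m0.length st row column) st) ((0 : Int), (-1 : Int), (-1 : Int)) := by
    rw [pvCells, List.foldl_flatMap]
    congr 1
    funext st row
    rw [List.foldl_map]
    rfl
  rw [← hflat]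
  rw [pvFoldlCongrInv (pvCells (m0 :: rest)) (fun st => 0 ≤ st.1) _ (pvCStep (m0 :: rest))
    ((0 : Int), (-1 : Int), (-1 : Int)) (by norm_num)
    (fun st q hq hmem => by
      rw [pvCStep]
      split
      · simp
      · exact hq)
    (fun st q hq hmem => by
      obtain ⟨hq1, hq2⟩ := pvCells_mem.mp hmem
      exact pvScanCell_eq st hq hq1 hq2 hw0 hh0)]

theorem pvFindSomeRangeExt {β : Type} (n n' : Nat) (h : n ≤ n') (f : Nat → Option β)
    (hnone : ∀ k, n ≤ k → k < n' → f k = none) :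
    (List.range n').findSome? f = (List.range n).findSome? f := by
  obtain ⟨d, rfl⟩ : ∃ d, n' = n + d := ⟨n' - n, by omega⟩
  rw [List.range_add, List.findSome?_append]
  have : ((List.range d).map (fun x => n + x)).findSome? f = none := by
    rw [pvFindSomeMap, List.findSome?_eq_none_iff]
    intro k hk
    rw [List.mem_range] at hk
    exact hnone (n + k) (by omega) (by omega)
  rw [this, Option.or_none]

-- ---- B's scan characterised by a run recurrence ----
-- run recurrence with a carried seed (the scan after the first element)
def pvRunT (run : Int) (vs : List Int) : Nat → Int
  | 0 => if vs.getD 0 0 = 0 then 0 else run + 1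
  | (c + 1) => if vs.getD (c + 1) 0 = 0 then 0 else pvRunT run vs c + 1

-- run recurrence with raw first element (the whole scan)
def pvRunS (vs : List Int) : Nat → Int
  | 0 => vs.getD 0 0
  | (c + 1) => if vs.getD (c + 1) 0 = 0 then 0 else pvRunS vs c + 1

theorem pvScanAux_length (run : Int) (first : Bool) (vs : List Int) :
    (pvScanAux run first vs).length = vs.length := by
  induction vs generalizing run first with
  | nil => rfl
  | cons v rest ih => simp [pvScanAux, ih]

theorem pvScan_length (vs : List Int) : (pvScan vs).length = vs.length :=
  pvScanAux_length 0 true vs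

theorem pvRunT_cons (run v : Int) (rest : List Int) (c : Nat) :
    pvRunT run (v :: rest) (c + 1) = pvRunT (if v = 0 then 0 else run + 1) rest c := by
  induction c with
  | zero => simp [pvRunT]
  | succ c ih =>
    show (if (v :: rest).getD (c + 2) 0 = 0 then 0 else pvRunT run (v :: rest) (c + 1) + 1) =
      (if rest.getD (c + 1) 0 = 0 then 0 else pvRunT (if v = 0 then 0 else run + 1) rest c + 1)
    rw [List.getD_cons_succ, ih]

theorem pvScanAux_getD (c : Nat) (vs : List Int) (run : Int) (hc : c < vs.length) :
    (pvScanAux run false vs).getD c 0 = pvRunT run vs c := by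
  induction c generalizing vs run with
  | zero =>
    match vs with
    | v :: rest => simp [pvScanAux, pvRunT]
  | succ c ih =>
    match vs with
    | v :: rest =>
      have hc' : c < rest.length := by simpa using hc
      simp only [pvScanAux, List.getD_cons_succ, Bool.false_eq_true, if_false]
      rw [ih rest _ hc', pvRunT_cons]

theorem pvRunS_cons (v : Int) (rest : List Int) (c : Nat) :
    pvRunS (v :: rest) (c + 1) = pvRunT v rest c := by
  induction c with
  | zero => simp [pvRunS, pvRunT]
  | succ c ih =>
    show (if (v :: rest).getD (c + 2) 0 = 0 then 0 else pvRunS (v :: rest) (c + 1) + 1) =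
      (if rest.getD (c + 1) 0 = 0 then 0 else pvRunT v rest c + 1)
    rw [List.getD_cons_succ, ih]

theorem pvScan_getD (c : Nat) (vs : List Int) (hc : c < vs.length) :
    (pvScan vs).getD c 0 = pvRunS vs c := by
  match vs with
  | v :: rest =>
    have hscan : pvScan (v :: rest) = v :: pvScanAux v false rest := by
      simp [pvScan, pvScanAux]
    rw [hscan]
    match c with
    | 0 => rfl
    | c + 1 =>
      have hc' : c < rest.length := by simpa using hc
      rw [List.getD_cons_succ, pvScanAux_getD c rest v hc', pvRunS_cons]

-- ---- getD helpers ----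
theorem pvGetD_map {α β : Type} (f : α → β) (l : List α) (r : Nat) (hr : r < l.length)
    (d : β) (d' : α) : (l.map f).getD r d = f (l.getD r d') := by
  simp [List.getD_eq_getElem?_getD, List.getElem?_map, List.getElem?_eq_getElem hr]

theorem pvGetD_reverse (l : List Int) (c : Nat) (hc : c < l.length) :
    l.reverse.getD c 0 = l.getD (l.length - 1 - c) 0 := by
  have h1 : c < l.reverse.length := by simpa using hc
  have h2 : l.length - 1 - c < l.length := by omega
  rw [List.getD_eq_getElem?_getD, List.getElem?_eq_getElem h1,
      List.getD_eq_getElem?_getD, List.getElem?_eq_getElem h2]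
  simp [List.getElem_reverse]

theorem pvGetD_take (l : List Int) (n c : Nat) (hc : c < n) :
    (l.take n).getD c 0 = l.getD c 0 := by
  simp [List.getD_eq_getElem?_getD, List.getElem?_take_of_lt hc]

-- ---- B's tables read as A's run recurrences (under Pre_) ----
-- rows of B: rows.getD r [] = (m.getD r []).take w, of length w under Pre_
theorem pvBrow_len (m : List (List Int)) (hpre : Pre_findLargestSquareSurroundedByOne m)
    (r : Nat) (hr : r < m.length) : ((m.getD r []).take (pvW m)).length = pvW m := by
  have hmem : m.getD r [] ∈ m := by
    rw [List.getD_eq_getElem?_getD, List.getElem?_eq_getElem hr]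
    exact List.getElem_mem hr
  have := hpre _ hmem
  simp only [pvW]
  simp only [List.length_take]
  omega

theorem pvRowsGetD (m : List (List Int)) (w : Nat) (r : Nat) (hr : r < m.length) :
    (m.map (fun row => row.take w)).getD r [] = (m.getD r []).take w :=
  pvGetD_map _ m r hr [] []

theorem pvBrowCell (m : List (List Int)) (r c : Nat) (hc : c < pvW m) :
    ((m.getD r []).take (pvW m)).getD c 0 = pvCell m r c := by
  rw [pvGetD_take _ _ _ hc]; rfl

-- ltr read
theorem pvRunS_ltr (m : List (List Int)) (r : Nat) :
    ∀ c, c < pvW m → pvRunS ((m.getD r []).take (pvW m)) c = pvLtrS m r c := by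
  intro c
  induction c with
  | zero => intro hc; rw [pvRunS, pvLtrS, pvBrowCell m r 0 hc]
  | succ c ih =>
    intro hc
    rw [pvRunS, pvLtrS, pvBrowCell m r (c + 1) hc, ih (by omega)]

-- rtl read (on the reversed row)
theorem pvRunS_rtl (m : List (List Int)) (hpre : Pre_findLargestSquareSurroundedByOne m)
    (r : Nat) (hr : r < m.length) :
    ∀ k, k < pvW m →
      pvRunS ((m.getD r []).take (pvW m)).reverse k = pvRtlS m (pvW m) r (pvW m - 1 - k) := by
  have hlen := pvBrow_len m hpre r hr
  intro k
  induction k with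
  | zero =>
    intro hk
    rw [pvRunS, pvGetD_reverse _ 0 (by omega), hlen]
    rw [pvBrowCell m r (pvW m - 1 - 0) (by omega)]
    simp only [Nat.sub_zero]
    rw [pvRtlS_last m (pvW m) r (by omega)]
  | succ k ih =>
    intro hk
    have harith : pvW m - 1 - (k + 1) + 1 = pvW m - 1 - k := by omega
    have hstep : pvRtlS m (pvW m) r (pvW m - 1 - (k + 1)) =
        (if pvCell m r (pvW m - 1 - (k + 1)) = 0 then 0
         else pvRtlS m (pvW m) r (pvW m - 1 - k) + 1) := by
      rw [pvRtlS, dif_pos (by omega : pvW m - 1 - (k + 1) + 1 < pvW m), harith]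
    rw [pvRunS, pvGetD_reverse _ (k + 1) (by omega), hlen]
    rw [pvBrowCell m r (pvW m - 1 - (k + 1)) (by omega), ih (by omega), hstep]

-- column c of B: (cols.getD c []) with entries pvCell m r c, of length m.length
theorem pvColGetD (m : List (List Int))
    (c : Nat) (hc : c < pvW m) (r : Nat) (hr : r < m.length) :
    ((m.map (fun row => row.take (pvW m))).map (fun row => row.getD c 0)).getD r 0 =
      pvCell m r c := by
  have h1 : r < (m.map (fun row => row.take (pvW m))).length := by simpa using hr
  rw [pvGetD_map _ _ r h1 0 [], pvRowsGetD m (pvW m) r hr, pvBrowCell m r c hc]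

-- ttb read
theorem pvRunS_ttb (m : List (List Int))
    (c : Nat) (hc : c < pvW m) :
    ∀ r, r < m.length →
      pvRunS ((m.map (fun row => row.take (pvW m))).map (fun row => row.getD c 0)) r =
        pvTtbS m c r := by
  intro r
  induction r with
  | zero => intro hr; rw [pvRunS, pvTtbS, pvColGetD m c hc 0 hr]
  | succ r ih =>
    intro hr
    rw [pvRunS, pvTtbS, pvColGetD m c hc (r + 1) hr, ih (by omega)]

-- btt read (on the reversed column)
theorem pvRunS_btt (m : List (List Int))
    (c : Nat) (hc : c < pvW m) :
    ∀ k, k < m.length →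
      pvRunS ((m.map (fun row => row.take (pvW m))).map (fun row => row.getD c 0)).reverse k =
        pvBttS m m.length (m.length - 1 - k) c := by
  have hlen : ((m.map (fun row => row.take (pvW m))).map (fun row => row.getD c 0)).length
      = m.length := by simp
  intro k
  induction k with
  | zero =>
    intro hk
    rw [pvRunS, pvGetD_reverse _ 0 (by omega), hlen]
    rw [pvColGetD m c hc (m.length - 1 - 0) (by omega)]
    simp only [Nat.sub_zero]
    rw [pvBttS_last m m.length c (by omega)]
  | succ k ih =>
    intro hk
    have harith : m.length - 1 - (k + 1) + 1 = m.length - 1 - k := by omega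
    have hstep : pvBttS m m.length (m.length - 1 - (k + 1)) c =
        (if pvCell m (m.length - 1 - (k + 1)) c = 0 then 0
         else pvBttS m m.length (m.length - 1 - k) c + 1) := by
      rw [pvBttS, dif_pos (by omega : m.length - 1 - (k + 1) + 1 < m.length), harith]
    rw [pvRunS, pvGetD_reverse _ (k + 1) (by omega), hlen]
    rw [pvColGetD m c hc (m.length - 1 - (k + 1)) (by omega), ih (by omega), hstep]

-- B's table names, for the proofs (definitionally the lets of the port)
def pvBrows (m : List (List Int)) (w : Nat) : List (List Int) :=
  m.map (fun row => row.take w)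
def pvBltr (m : List (List Int)) (w : Nat) : List (List Int) :=
  (pvBrows m w).map pvScan
def pvBrtl (m : List (List Int)) (w : Nat) : List (List Int) :=
  (pvBrows m w).map (fun row => (pvScan row.reverse).reverse)
def pvBcols (m : List (List Int)) (w : Nat) : List (List Int) :=
  (List.range w).map (fun c => (pvBrows m w).map (fun row => row.getD c 0))
def pvBttb (m : List (List Int)) (w : Nat) : List (List Int) :=
  (pvBcols m w).map pvScan
def pvBbtt (m : List (List Int)) (w : Nat) : List (List Int) :=
  (pvBcols m w).map (fun col => (pvScan col.reverse).reverse)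

-- the four reads B's search makes, as A's run recurrences
theorem pvBread_ltr (m : List (List Int)) (hpre : Pre_findLargestSquareSurroundedByOne m)
    (r c : Nat) (hr : r < m.length) (hc : c < pvW m) :
    ((pvBltr m (pvW m)).getD r []).getD c 0 = pvLtrS m r c := by
  have h1 : r < (pvBrows m (pvW m)).length := by simp [pvBrows]; omega
  rw [pvBltr, pvGetD_map _ _ r h1 [] []]
  rw [show (pvBrows m (pvW m)).getD r [] = (m.getD r []).take (pvW m) from
    pvRowsGetD m (pvW m) r hr]
  rw [pvScan_getD c _ (by rw [pvBrow_len m hpre r hr]; omega), pvRunS_ltr m r c hc]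

theorem pvBread_rtl (m : List (List Int)) (hpre : Pre_findLargestSquareSurroundedByOne m)
    (r c : Nat) (hr : r < m.length) (hc : c < pvW m) :
    ((pvBrtl m (pvW m)).getD r []).getD c 0 = pvRtlS m (pvW m) r c := by
  have h1 : r < (pvBrows m (pvW m)).length := by simp [pvBrows]; omega
  have hlen := pvBrow_len m hpre r hr
  rw [pvBrtl, pvGetD_map _ _ r h1 [] []]
  rw [show (pvBrows m (pvW m)).getD r [] = (m.getD r []).take (pvW m) from
    pvRowsGetD m (pvW m) r hr]
  have hslen : (pvScan ((m.getD r []).take (pvW m)).reverse).length = pvW m := by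
    rw [pvScan_length, List.length_reverse, hlen]
  rw [pvGetD_reverse _ c (by rw [hslen]; omega), hslen]
  rw [pvScan_getD _ _ (by rw [List.length_reverse, hlen]; omega)]
  rw [pvRunS_rtl m hpre r hr (pvW m - 1 - c) (by omega)]
  congr 1
  omega

theorem pvBread_ttb (m : List (List Int))
    (r c : Nat) (hr : r < m.length) (hc : c < pvW m) :
    ((pvBttb m (pvW m)).getD c []).getD r 0 = pvTtbS m c r := by
  have h1 : c < (pvBcols m (pvW m)).length := by simp [pvBcols]; omega
  rw [pvBttb, pvGetD_map _ _ c h1 [] []]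
  have hcol : (pvBcols m (pvW m)).getD c [] =
      (m.map (fun row => row.take (pvW m))).map (fun row => row.getD c 0) := by
    rw [pvBcols, pvGetD_map _ _ c (by simp; omega) [] 0]
    simp only [pvBrows]
    congr 1
    simp [List.getD_eq_getElem?_getD, List.getElem?_range hc]
  rw [hcol]
  rw [pvScan_getD r _ (by simp; omega), pvRunS_ttb m c hc r hr]

theorem pvBread_btt (m : List (List Int))
    (r c : Nat) (hr : r < m.length) (hc : c < pvW m) :
    ((pvBbtt m (pvW m)).getD c []).getD r 0 = pvBttS m m.length r c := by
  have h1 : c < (pvBcols m (pvW m)).length := by simp [pvBcols]; omega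
  rw [pvBbtt, pvGetD_map _ _ c h1 [] []]
  have hcol : (pvBcols m (pvW m)).getD c [] =
      (m.map (fun row => row.take (pvW m))).map (fun row => row.getD c 0) := by
    rw [pvBcols, pvGetD_map _ _ c (by simp; omega) [] 0]
    simp only [pvBrows]
    congr 1
    simp [List.getD_eq_getElem?_getD, List.getElem?_range hc]
  rw [hcol]
  have hclen : ((m.map (fun row => row.take (pvW m))).map (fun row => row.getD c 0)).length
      = m.length := by simp
  have hslen : (pvScan ((m.map (fun row => row.take (pvW m))).map
      (fun row => row.getD c 0)).reverse).length = m.length := by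
    rw [pvScan_length, List.length_reverse, hclen]
  rw [pvGetD_reverse _ r (by rw [hslen]; omega), hslen]
  rw [pvScan_getD _ _ (by rw [List.length_reverse, hclen]; omega)]
  rw [pvRunS_btt m c hc (m.length - 1 - r) (by omega)]
  congr 1
  omega

-- B's four-way test equals pvValidB on fitting squares
theorem pvValidB_eq_condB (m : List (List Int)) (hpre : Pre_findLargestSquareSurroundedByOne m)
    (s r c : Nat) (h1 : 1 ≤ s) (h2 : r + s ≤ pvH m) (h3 : c + s ≤ pvW m) :
    (pvValidB m s r c = true) =
      (((pvBrtl m (pvW m)).getD r []).getD c 0 ≥ (s : Int) ∧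
       (((pvBbtt m (pvW m)).getD c []).getD r 0 ≥ (s : Int)) ∧
       (((pvBltr m (pvW m)).getD (r + s - 1) []).getD (c + s - 1) 0 ≥ (s : Int)) ∧
       (((pvBttb m (pvW m)).getD (c + s - 1) []).getD (r + s - 1) 0 ≥ (s : Int))) := by
  have hH : pvH m = m.length := rfl
  rw [pvBread_rtl m hpre r c (by rw [← hH]; omega) (by omega),
      pvBread_btt m r c (by rw [← hH]; omega) (by omega),
      pvBread_ltr m hpre (r + s - 1) (c + s - 1) (by rw [← hH]; omega) (by omega),
      pvBread_ttb m (r + s - 1) (c + s - 1) (by rw [← hH]; omega) (by omega),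
      show pvBttS m m.length r c = pvBttS m (pvH m) r c from rfl]
  apply propext
  rw [pvValidB_iff]
  constructor
  · rintro ⟨_, _, _, h4, h5, h6, h7⟩
    exact ⟨h4, h5, h6, h7⟩
  · rintro ⟨h4, h5, h6, h7⟩
    exact ⟨h1, h2, h3, h4, h5, h6, h7⟩

-- B's inner double loop at a fixed size finds the first valid row-major cell
theorem pvInnerChar (m : List (List Int)) (hpre : Pre_findLargestSquareSurroundedByOne m)
    {s : Nat} (h1 : 1 ≤ s) (hsh : s ≤ pvH m) (hsw : s ≤ pvW m) :
    (List.range (pvH m - s + 1)).findSome? (fun r =>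
      (List.range (pvW m - s + 1)).findSome? (fun c =>
        if ((pvBrtl m (pvW m)).getD r []).getD c 0 ≥ (s : Int) ∧
           (((pvBbtt m (pvW m)).getD c []).getD r 0 ≥ (s : Int)) ∧
           (((pvBltr m (pvW m)).getD (r + s - 1) []).getD (c + s - 1) 0 ≥ (s : Int)) ∧
           (((pvBttb m (pvW m)).getD (c + s - 1) []).getD (r + s - 1) 0 ≥ (s : Int))
        then some ((s : Int), (r : Int), (c : Int)) else none)) =
    ((pvCells m).find? (fun q => pvValidB m s q.1 q.2)).map
      (fun q => ((s : Int), (q.1 : Int), (q.2 : Int))) := by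
  rw [pvFindEqFindSome, pvMapFindSome, pvCells, pvFindSomeFlatMap]
  have hrow : ∀ r : Nat, ((List.range (pvW m)).map (fun c => (r, c))).findSome?
      (fun q => (if pvValidB m s q.1 q.2 then some q else none).map
        (fun q => ((s : Int), (q.1 : Int), (q.2 : Int)))) =
      (List.range (pvW m)).findSome? (fun c =>
        if pvValidB m s r c then some ((s : Int), (r : Int), (c : Int)) else none) := by
    intro r
    rw [pvFindSomeMap]
    apply pvFindSomeCongr
    intro c _
    simp only [Function.comp_apply]
    by_cases hv : pvValidB m s r c = true
    · simp [hv]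
    · simp [hv]
  rw [pvFindSomeCongr _ _ _ (fun r _ => hrow r)]
  rw [pvFindSomeRangeExt (pvH m - s + 1) (pvH m) (by omega) _ (fun r hr1 hr2 => by
    have hnone2 : ∀ c, (fun c =>
        if pvValidB m s r c then some ((s : Int), (r : Int), (c : Int)) else none) c = none := by
      intro c
      have : pvValidB m s r c = false := by
        rw [← Bool.not_eq_true, pvValidB_iff]
        intro hv
        omega
      simp [this]
    rw [List.findSome?_eq_none_iff]
    exact fun c _ => hnone2 c)]
  apply pvFindSomeCongr
  intro r hr
  rw [List.mem_range] at hr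
  rw [pvFindSomeRangeExt (pvW m - s + 1) (pvW m) (by omega) _ (fun c hc1 hc2 => by
    have : pvValidB m s r c = false := by
      rw [← Bool.not_eq_true, pvValidB_iff]
      intro hv
      omega
    simp [this])]
  apply pvFindSomeCongr
  intro c hc
  rw [List.mem_range] at hc
  have hiff := iff_of_eq (pvValidB_eq_condB m hpre s r c h1 (by omega) (by omega))
  by_cases hv : pvValidB m s r c = true
  · rw [if_pos (hiff.mp hv), if_pos hv]
  · rw [if_neg (fun hcond => hv (hiff.mpr hcond)), if_neg hv]

-- ---- port B reaches the same value ----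
theorem pvPortB_eq {m0 : List Int} {rest : List (List Int)} (hw : m0.length ≠ 0) :
    findLargestSquareSurroundedByOne_alt (m0 :: rest) =
      (match ((List.range (min (m0 :: rest).length m0.length)).map
          (fun k => min (m0 :: rest).length m0.length - k)).findSome? (fun s =>
        (List.range ((m0 :: rest).length - s + 1)).findSome? (fun r =>
          (List.range (m0.length - s + 1)).findSome? (fun c =>
            if ((pvBrtl (m0 :: rest) m0.length).getD r []).getD c 0 ≥ (s : Int) ∧
               (((pvBbtt (m0 :: rest) m0.length).getD c []).getD r 0 ≥ (s : Int)) ∧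
               (((pvBltr (m0 :: rest) m0.length).getD (r + s - 1) []).getD (c + s - 1) 0 ≥ (s : Int)) ∧
               (((pvBttb (m0 :: rest) m0.length).getD (c + s - 1) []).getD (r + s - 1) 0 ≥ (s : Int))
            then some ((s : Int), (r : Int), (c : Int)) else none))) with
       | some t => some t
       | none => some (0, -1, -1)) := by
  show (if m0.length = 0 then none else _) = _
  rw [if_neg hw]
  rfl

theorem pvPortB_none {m0 : List Int} {rest : List (List Int)} (hw : m0.length ≠ 0)
    (hpre : Pre_findLargestSquareSurroundedByOne (m0 :: rest))
    (hM : pvMOf (m0 :: rest) (pvCells (m0 :: rest)) = 0) :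
    findLargestSquareSurroundedByOne_alt (m0 :: rest) = some (0, -1, -1) := by
  have hbound : ∀ q ∈ pvCells (m0 :: rest), pvCB (m0 :: rest) q.1 q.2 ≤ pvMOf (m0 :: rest) (pvCells (m0 :: rest)) :=
    (PySem.List.le_foldl_max_nat (pvCells (m0 :: rest)) (fun q' => pvCB (m0 :: rest) q'.1 q'.2) 0).2
  rw [pvPortB_eq hw]
  have hfind_none : ∀ s : Nat, 1 ≤ s →
      (pvCells (m0 :: rest)).find? (fun q => pvValidB (m0 :: rest) s q.1 q.2) = none := by
    intro s hs
    rw [List.find?_eq_none]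
    intro q hq hv
    have h1 := pvCB_le_of_valid hv
    have h2 := hbound q hq
    omega
  have hhit : ((List.range (min (m0 :: rest).length m0.length)).map
      (fun k => min (m0 :: rest).length m0.length - k)).findSome? (fun s =>
        (List.range ((m0 :: rest).length - s + 1)).findSome? (fun r =>
          (List.range (m0.length - s + 1)).findSome? (fun c =>
            if ((pvBrtl (m0 :: rest) m0.length).getD r []).getD c 0 ≥ (s : Int) ∧
               (((pvBbtt (m0 :: rest) m0.length).getD c []).getD r 0 ≥ (s : Int)) ∧
               (((pvBltr (m0 :: rest) m0.length).getD (r + s - 1) []).getD (c + s - 1) 0 ≥ (s : Int)) ∧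
               (((pvBttb (m0 :: rest) m0.length).getD (c + s - 1) []).getD (r + s - 1) 0 ≥ (s : Int))
            then some ((s : Int), (r : Int), (c : Int)) else none))) = none := by
    rw [List.findSome?_eq_none_iff]
    intro s hsmem
    rw [List.mem_map] at hsmem
    obtain ⟨k, hk, rfl⟩ := hsmem
    rw [List.mem_range] at hk
    have h1 : 1 ≤ min (m0 :: rest).length m0.length - k := by omega
    have hb2 : min (m0 :: rest).length m0.length - k ≤ (m0 :: rest).length ∧
        min (m0 :: rest).length m0.length - k ≤ m0.length := by omega
    have hchar := pvInnerChar (m0 :: rest) hpre (s := min (m0 :: rest).length m0.length - k)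
      h1 hb2.1 hb2.2
    simp only [pvH, pvW, List.headD_cons] at hchar
    exact hchar.trans (by rw [hfind_none _ h1]; rfl)
  rw [hhit]

theorem pvPortB_some {m0 : List Int} {rest : List (List Int)} (hw : m0.length ≠ 0)
    (hpre : Pre_findLargestSquareSurroundedByOne (m0 :: rest))
    {q0 : Nat × Nat} (hM : 0 < pvMOf (m0 :: rest) (pvCells (m0 :: rest)))
    (hfind : (pvCells (m0 :: rest)).find? (pvPred (m0 :: rest) (pvCells (m0 :: rest))) = some q0) :
    findLargestSquareSurroundedByOne_alt (m0 :: rest) =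
      some ((pvMOf (m0 :: rest) (pvCells (m0 :: rest)) : Int), (q0.1 : Int), (q0.2 : Int)) := by
  have hbound : ∀ q ∈ pvCells (m0 :: rest), pvCB (m0 :: rest) q.1 q.2 ≤ pvMOf (m0 :: rest) (pvCells (m0 :: rest)) :=
    (PySem.List.le_foldl_max_nat (pvCells (m0 :: rest)) (fun q' => pvCB (m0 :: rest) q'.1 q'.2) 0).2
  set M := pvMOf (m0 :: rest) (pvCells (m0 :: rest)) with hMdef
  have hpred := List.find?_some hfind
  simp only [pvPred, decide_eq_true_eq] at hpred
  obtain ⟨hcb0, hcbM⟩ := hpred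
  have hvM : pvValidB (m0 :: rest) M q0.1 q0.2 = true := by
    rw [hMdef, ← hcbM]
    exact pvCB_valid hcb0
  obtain ⟨hM1, hMh, hMw, _, _, _, _⟩ := pvValidB_iff.mp hvM
  have hMmin : M ≤ min (m0 :: rest).length m0.length := by
    simp only [pvH, pvW, List.headD_cons] at hMh hMw
    omega
  rw [pvPortB_eq hw]
  set mn := min (m0 :: rest).length m0.length with hmn
  -- split the descending size list at s = M
  have hsplit : List.range mn = List.range (mn - M) ++ (List.range M).map (fun x => (mn - M) + x) := by
    rw [← List.range_add]
    congr 1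
    omega
  have hfind_none : ∀ s : Nat, M < s →
      (pvCells (m0 :: rest)).find? (fun q => pvValidB (m0 :: rest) s q.1 q.2) = none := by
    intro s hs
    rw [List.find?_eq_none]
    intro q hq hv
    have h1 := pvCB_le_of_valid hv
    have h2 := hbound q hq
    omega
  have hinner : ∀ s : Nat, 1 ≤ s → s ≤ mn →
      (List.range ((m0 :: rest).length - s + 1)).findSome? (fun r =>
        (List.range (m0.length - s + 1)).findSome? (fun c =>
          if ((pvBrtl (m0 :: rest) m0.length).getD r []).getD c 0 ≥ (s : Int) ∧
             (((pvBbtt (m0 :: rest) m0.length).getD c []).getD r 0 ≥ (s : Int)) ∧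
             (((pvBltr (m0 :: rest) m0.length).getD (r + s - 1) []).getD (c + s - 1) 0 ≥ (s : Int)) ∧
             (((pvBttb (m0 :: rest) m0.length).getD (c + s - 1) []).getD (r + s - 1) 0 ≥ (s : Int))
          then some ((s : Int), (r : Int), (c : Int)) else none)) =
      ((pvCells (m0 :: rest)).find? (fun q => pvValidB (m0 :: rest) s q.1 q.2)).map
        (fun q => ((s : Int), (q.1 : Int), (q.2 : Int))) := by
    intro s h1 h2
    rw [hmn] at h2
    have h2' : s ≤ (m0 :: rest).length ∧ s ≤ m0.length := by omega
    have hchar := pvInnerChar (m0 :: rest) hpre (s := s) h1 h2'.1 h2'.2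
    simp only [pvH, pvW, List.headD_cons] at hchar
    exact hchar
  have hfindM : (pvCells (m0 :: rest)).find? (fun q => pvValidB (m0 :: rest) M q.1 q.2) = some q0 := by
    rw [← hfind]
    apply pvFindCongr
    intro q hq
    rcases Bool.eq_false_or_eq_true (pvValidB (m0 :: rest) M q.1 q.2) with hv | hv
    · rw [hv]
      have hle := pvCB_le_of_valid hv
      have hge := hbound q hq
      symm
      simp only [pvPred, decide_eq_true_eq]
      omega
    · rw [hv]
      symm
      simp only [pvPred, decide_eq_false_iff_not]
      intro hcon
      obtain ⟨hpos, hEq⟩ := hcon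
      have : pvValidB (m0 :: rest) M q.1 q.2 = true := by
        rw [hMdef, ← hEq]
        exact pvCB_valid hpos
      rw [this] at hv
      exact absurd hv (by simp)
  have hhit : ((List.range mn).map (fun k => mn - k)).findSome? (fun s =>
      (List.range ((m0 :: rest).length - s + 1)).findSome? (fun r =>
        (List.range (m0.length - s + 1)).findSome? (fun c =>
          if ((pvBrtl (m0 :: rest) m0.length).getD r []).getD c 0 ≥ (s : Int) ∧
             (((pvBbtt (m0 :: rest) m0.length).getD c []).getD r 0 ≥ (s : Int)) ∧
             (((pvBltr (m0 :: rest) m0.length).getD (r + s - 1) []).getD (c + s - 1) 0 ≥ (s : Int)) ∧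
             (((pvBttb (m0 :: rest) m0.length).getD (c + s - 1) []).getD (r + s - 1) 0 ≥ (s : Int))
          then some ((s : Int), (r : Int), (c : Int)) else none))) =
      some ((M : Int), (q0.1 : Int), (q0.2 : Int)) := by
    rw [hsplit, List.map_append, List.findSome?_append]
    have hpre_none : ((List.range (mn - M)).map (fun k => mn - k)).findSome? (fun s =>
        (List.range ((m0 :: rest).length - s + 1)).findSome? (fun r =>
          (List.range (m0.length - s + 1)).findSome? (fun c =>
            if ((pvBrtl (m0 :: rest) m0.length).getD r []).getD c 0 ≥ (s : Int) ∧
               (((pvBbtt (m0 :: rest) m0.length).getD c []).getD r 0 ≥ (s : Int)) ∧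
               (((pvBltr (m0 :: rest) m0.length).getD (r + s - 1) []).getD (c + s - 1) 0 ≥ (s : Int)) ∧
               (((pvBttb (m0 :: rest) m0.length).getD (c + s - 1) []).getD (r + s - 1) 0 ≥ (s : Int))
            then some ((s : Int), (r : Int), (c : Int)) else none))) = none := by
      rw [pvFindSomeMap]
      rw [List.findSome?_eq_none_iff]
      intro k hk
      rw [List.mem_range] at hk
      simp only [Function.comp_apply]
      rw [hinner (mn - k) (by omega) (by omega), hfind_none (mn - k) (by omega)]
      rfl
    rw [hpre_none, Option.none_or]
    have hMsz : M = (M - 1) + 1 := by omega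
    rw [hMsz, List.range_succ_eq_map]
    simp only [List.map_cons, List.findSome?_cons]
    have hs0 : mn - (mn - ((M - 1) + 1) + 0) = M := by omega
    rw [hs0, hinner M (by omega) hMmin, hfindM]
    simp only [Option.map_some]
    have hM' : ((M - 1 + 1 : Nat) : Int) = (M : Int) := by omega
    rw [hM']
  rw [hhit]

-- ===== VERDICT (by name: the statement is the Claim_ definition above) =====
theorem findLargestSquareSurroundedByOne_spec : Claim_equal_findLargestSquareSurroundedByOne := by
  intro matrix _hdom hpre
  unfold Spec_findLargestSquareSurroundedByOne
  match matrix with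
  | [] => rfl
  | m0 :: rest =>
    by_cases hw : m0.length = 0
    · simp [findLargestSquareSurroundedByOne, findLargestSquareSurroundedByOne_alt, hw]
    · rw [pvPortA_eq hw]
      rcases pvCanonFold (m0 :: rest) (pvCells (m0 :: rest)) with
        ⟨hM, _hfind, hfold⟩ | ⟨hM, q0, hfind, _hcb, hfold⟩
      · rw [hfold, pvPortB_none hw hpre hM]
      · rw [hfold, pvPortB_some hw hpre hM hfind]
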